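-- pv_equiv track=rewrite | github.com/Chaerim0626/ps-study | 프로그래머스/2/250136. ［PCCP 기출문제］ 2번 ／ 석유 시추/［PCCP 기출문제］ 2번 ／ 석유 시추.py | solution
-- ===== SOURCE A (Python) =====
-- from collections import deque
--
-- def solution(land):
--
--     n = len(land)
--     m = len(land[0])
--     visited = [[0] * m for _ in range(n)]
--     sizes = []
--     loc = []
--
--     def isvalid(x,y):
--         return 0 <= x < n and 0 <= y < m
--
--     def bfs(i,j,t):
--         dq = deque()
--         dq.append((i,j))
--         visited[i][j] = 1
--         dir = [(0,1), (0,-1), (1,0), (-1,0)]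
--
--         size = 1
--         loc.append((i,j,t))
--
--         while dq:
--             cx,cy = dq.popleft()
--
--             for dx, dy in dir:
--                 nx,ny = cx+dx, cy+dy
--
--                 if isvalid(nx,ny) and land[nx][ny]:
--                     if not visited[nx][ny]:
--                         dq.append((nx,ny))
--                         visited[nx][ny] = 1
--                         size += 1
--                         loc.append((nx,ny,t))
--         return size
--
--     t = 1
--     for i in range(n):
--         for j in range(m):
--             if land[i][j] and not visited[i][j]:
--                 r = bfs(i,j,t)
--                 sizes.append((t,r))
--                 t += 1
--
--     for i,j,t in loc:
--         visited[i][j] = sizes[t-1][1]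
--
--     # 이제 해야할일 : 같은 영역은 set취급하여 열별로 계산
--
--     loc.sort(key=lambda x: x[1])
--
--     result = []
--     result.append((loc[0][0],loc[0][1],visited[loc[0][0]][loc[0][1]]))
--
--     for i in range(1, len(loc)):
--         if loc[i][1] == loc[i-1][1] and loc[i][2] == loc[i-1][2]:
--             # 같은 열이고, 같은 그룹이라면
--             pass
--         else:
--             result.append((loc[i][0],loc[i][1],visited[loc[i][0]][loc[i][1]]))
--
--     answer = 0
--     cur = result[0][2]
--
--     for i in range(1,len(result)):
--         if result[i-1][1] == result[i][1]:
--             cur += result[i][2]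
--
--         else: # 다르면 열이 바뀐거니까 갱신
--             answer = max(cur, answer)
--             cur = result[i][2]
--
--     answer = max(cur,answer)
--     return answer
-- ===== SOURCE B (Python) =====
-- def solution(land):
--     n, m = len(land), len(land[0])
--     seen = set()
--     col_total = {}
--     for si in range(n):
--         for sj in range(m):
--             if land[si][sj] and (si, sj) not in seen:
--                 seen.add((si, sj))
--                 cells = [(si, sj)]
--                 k = 0
--                 while k < len(cells):
--                     x, y = cells[k]
--                     k += 1
--                     for nx, ny in ((x, y + 1), (x, y - 1), (x + 1, y), (x - 1, y)):
--                         if 0 <= nx < n and 0 <= ny < m and land[nx][ny] and (nx, ny) not in seen: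
--                             seen.add((nx, ny))
--                             cells.append((nx, ny))
--                 size = len(cells)
--                 for c in {y for _, y in cells}:
--                     col_total[c] = col_total.get(c, 0) + size
--     return max(col_total.values())
-- ===== Notes on version B (the rewrite author's own statement) =====
-- stated objective: simpler
-- what changed: B replaces A's whole pipeline (visited matrix, deque BFS, a global loc list, a size-overwrite pass over the matrix, a sort by column and two adjacent-pair dedup/scan passes) by a scan-pointer flood fill over a seen-coordinate set with per-component accumulation of its size into a column->total dict, returning the max of the dict values.
import Mathlib
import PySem

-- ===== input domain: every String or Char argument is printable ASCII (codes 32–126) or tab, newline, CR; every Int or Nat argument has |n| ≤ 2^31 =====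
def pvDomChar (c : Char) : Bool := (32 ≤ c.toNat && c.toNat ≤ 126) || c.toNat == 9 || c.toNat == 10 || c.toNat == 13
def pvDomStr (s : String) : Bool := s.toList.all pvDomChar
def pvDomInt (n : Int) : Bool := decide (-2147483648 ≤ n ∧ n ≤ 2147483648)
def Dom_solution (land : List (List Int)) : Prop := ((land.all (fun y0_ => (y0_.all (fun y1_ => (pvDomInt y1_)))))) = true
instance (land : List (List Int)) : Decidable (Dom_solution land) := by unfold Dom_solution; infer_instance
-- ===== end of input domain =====

-- B replaces A's visited matrix, deque BFS, global loc list, size-overwrite pass, sort and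
-- dedup/scan passes by a scan-pointer flood fill over a seen-set plus a column-total dict
-- (objective: simpler -- one pipeline instead of A's five passes).

-- ===== PORT A =====
-- A-side grid helpers (A reads/writes an n×m list-of-lists)
def gridGet (g : List (List Int)) (i j : Int) : Int :=
  PySem.List.pyGetD (PySem.List.pyGetD g i []) j 0

def gridSet (g : List (List Int)) (i j : Int) (v : Int) : List (List Int) :=
  PySem.List.pySetD g i (PySem.List.pySetD (PySem.List.pyGetD g i []) j v)

def isvalid (n m x y : Int) : Bool :=
  decide (0 ≤ x) && decide (x < n) && decide (0 ≤ y) && decide (y < m)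

def dirs : List (Int × Int) := [(0,1), (0,-1), (1,0), (-1,0)]

-- one neighbour check of A's bfs inner 'for dx, dy in dir' loop; state = (dq, visited, loc, size)
def stepA (land : List (List Int)) (n m t cx cy : Int)
    (s : List (Int × Int) × List (List Int) × List (Int × Int × Int) × Int) (d : Int × Int) :
    List (Int × Int) × List (List Int) × List (Int × Int × Int) × Int :=
  let nx := cx + d.1
  let ny := cy + d.2
  if isvalid n m nx ny && !(gridGet land nx ny == 0) then
    if gridGet s.2.1 nx ny == 0 then
      (s.1 ++ [(nx, ny)], gridSet s.2.1 nx ny 1, s.2.2.1 ++ [(nx, ny, t)], s.2.2.2 + 1)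
    else s
  else s

-- A's 'while dq' loop (fuel = an upper bound on the number of pops, supplied by the caller)
def bfsA (land : List (List Int)) (n m t : Int) :
    Nat → List (Int × Int) → List (List Int) → List (Int × Int × Int) → Int →
    List (List Int) × List (Int × Int × Int) × Int
  | 0, _, visited, loc, size => (visited, loc, size)
  | _ + 1, [], visited, loc, size => (visited, loc, size)
  | fuel + 1, (cx, cy) :: rest, visited, loc, size =>
    let s := dirs.foldl (stepA land n m t cx cy) (rest, visited, loc, size)
    bfsA land n m t fuel s.1 s.2.1 s.2.2.1 s.2.2.2

-- body of A's outer double loop; state = (visited, sizes, loc, t)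
def cellA (land : List (List Int)) (n m : Int) (fuel : Nat)
    (st : List (List Int) × List (Int × Int) × List (Int × Int × Int) × Int) (ij : Int × Int) :
    List (List Int) × List (Int × Int) × List (Int × Int × Int) × Int :=
  if !(gridGet land ij.1 ij.2 == 0) && (gridGet st.1 ij.1 ij.2 == 0) then
    -- python marks the start cell, seeds the deque and appends (i,j,t) to loc before the while loop
    let r := bfsA land n m st.2.2.2 fuel [(ij.1, ij.2)] (gridSet st.1 ij.1 ij.2 1)
      (st.2.2.1 ++ [(ij.1, ij.2, st.2.2.2)]) 1
    (r.1, st.2.1 ++ [(st.2.2.2, r.2.2)], r.2.1, st.2.2.2 + 1)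
  else st

def solution (land : List (List Int)) : Int :=
  let n := PySem.List.len land
  let m := PySem.List.len (PySem.List.pyGetD land 0 [])
  let fuel := land.length * (PySem.List.pyGetD land 0 []).length + 1
  let visited0 := (PySem.List.pyRange 0 n 1).map (fun _ => PySem.List.pyRepeat [(0 : Int)] m)
  let sc := (PySem.List.pyRange 0 n 1).foldl (fun st i =>
      (PySem.List.pyRange 0 m 1).foldl (fun st j => cellA land n m fuel st (i, j)) st)
    (visited0, [], [], 1)
  let sizes := sc.2.1
  -- for i,j,t in loc: visited[i][j] = sizes[t-1][1]
  let visited2 := sc.2.2.1.foldl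
    (fun v e => gridSet v e.1 e.2.1 (PySem.List.pyGetD sizes (e.2.2 - 1) (0, 0)).2) sc.1
  -- loc.sort(key=lambda x: x[1])
  let loc2 := PySem.List.sorted sc.2.2.1 (fun e => e.2.1) false
  let e0 := PySem.List.pyGetD loc2 0 (0, 0, 0)
  let result0 : List (Int × Int × Int) := [(e0.1, e0.2.1, gridGet visited2 e0.1 e0.2.1)]
  let result := (PySem.List.pyRange 1 (PySem.List.len loc2) 1).foldl (fun res i =>
      let a := PySem.List.pyGetD loc2 i (0, 0, 0)
      let b := PySem.List.pyGetD loc2 (i - 1) (0, 0, 0)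
      if a.2.1 == b.2.1 && a.2.2 == b.2.2 then res
      else res ++ [(a.1, a.2.1, gridGet visited2 a.1 a.2.1)]) result0
  let fin := (PySem.List.pyRange 1 (PySem.List.len result) 1).foldl
    (fun (p : Int × Int) i =>
      let a := PySem.List.pyGetD result (i - 1) (0, 0, 0)
      let b := PySem.List.pyGetD result i (0, 0, 0)
      if a.2.1 == b.2.1 then (p.1, p.2 + b.2.2) else (max p.2 p.1, b.2.2))
    (0, (PySem.List.pyGetD result 0 (0, 0, 0)).2.2)
  max fin.2 fin.1

-- ===== PORT B =====
-- B-side: seen coordinates live in a PySem.Set, a component grows by a scan pointer k over its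
-- own cell list, and each component's size is added to a column → total Dict.
def landAt (land : List (List Int)) (q : Int × Int) : Int :=
  PySem.List.pyGetD (PySem.List.pyGetD land q.1 []) q.2 0

def nbrs (x y : Int) : List (Int × Int) := [(x, y + 1), (x, y - 1), (x + 1, y), (x - 1, y)]

-- one candidate neighbour of B's 'for nx, ny in (…)' loop; state = (cells, seen)
def growStep (land : List (List Int)) (n m : Int)
    (s : List (Int × Int) × PySem.Set (Int × Int)) (q : Int × Int) :
    List (Int × Int) × PySem.Set (Int × Int) :=
  if decide (0 ≤ q.1) && decide (q.1 < n) && decide (0 ≤ q.2) && decide (q.2 < m)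
      && !(landAt land q == 0) && !(PySem.Set.contains s.2 q) then
    (s.1 ++ [q], PySem.Set.add s.2 q)
  else s

-- B's 'while k < len(cells)' loop (fuel = an upper bound on pointer advances)
def flood (land : List (List Int)) (n m : Int) :
    Nat → List (Int × Int) → Int → PySem.Set (Int × Int) →
    List (Int × Int) × PySem.Set (Int × Int)
  | 0, cells, _, seen => (cells, seen)
  | fuel + 1, cells, k, seen =>
    if decide (k < PySem.List.len cells) then
      flood land n m fuel
        ((nbrs (PySem.List.pyGetD cells k (0, 0)).1 (PySem.List.pyGetD cells k (0, 0)).2).foldl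
          (growStep land n m) (cells, seen)).1
        (k + 1)
        ((nbrs (PySem.List.pyGetD cells k (0, 0)).1 (PySem.List.pyGetD cells k (0, 0)).2).foldl
          (growStep land n m) (cells, seen)).2
    else (cells, seen)

-- body of B's outer double loop; state = (seen, col_total)
def visitCell (land : List (List Int)) (n m : Int) (fuel : Nat)
    (st : PySem.Set (Int × Int) × PySem.Dict Int Int) (ij : Int × Int) :
    PySem.Set (Int × Int) × PySem.Dict Int Int :=
  if !(landAt land ij == 0) && !(PySem.Set.contains st.1 ij) then
    let r := flood land n m fuel [ij] 0 (PySem.Set.add st.1 ij)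
    let size := PySem.List.len r.1
    -- for c in {y for _, y in cells}: col_total[c] = col_total.get(c, 0) + size
    (r.2, (PySem.Set.ofList (r.1.map (fun p => p.2))).foldl
      (fun d c => d.insert c (d.getD c 0 + size)) st.2)
  else st

def solution_alt (land : List (List Int)) : Int :=
  let n := PySem.List.len land
  let m := PySem.List.len (PySem.List.pyGetD land 0 [])
  let fuel := land.length * (PySem.List.pyGetD land 0 []).length + 1
  let st := (PySem.List.pyRange 0 n 1).foldl (fun st si =>
      (PySem.List.pyRange 0 m 1).foldl (fun st sj => visitCell land n m fuel st (si, sj)) st)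
    (PySem.Set.empty, PySem.Dict.empty)
  -- max(col_total.values()); nonempty under Pre_, the default is never used there
  PySem.List.maxD (PySem.Dict.values st.2) (fun v => v) 0

-- ===== PRECONDITION & SPEC =====
-- Pre_ is exactly A's return domain: A raises IndexError on an empty grid, on an empty first row,
-- when some later row is shorter than the first row (the outer loop indexes every row up to the
-- first row's width), and when every cell of the scanned window is zero (loc is then empty and A
-- indexes its first element).
def Pre_solution (land : List (List Int)) : Prop :=
  land ≠ [] ∧ 0 < (PySem.List.pyGetD land 0 []).length ∧
  (∀ row ∈ land, (PySem.List.pyGetD land 0 []).length ≤ row.length) ∧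
  ∃ i < land.length, ∃ j < (PySem.List.pyGetD land 0 []).length,
    (land.getD i []).getD j 0 ≠ 0

instance (land : List (List Int)) : Decidable (Pre_solution land) := by
  unfold Pre_solution; infer_instance

def pvWitness_solution : List (List Int) := [[0, 1], [1, 0]]

def Spec_solution (land : List (List Int)) (out : Int) : Prop := out = solution_alt land
instance (land : List (List Int)) (out : Int) : Decidable (Spec_solution land out) := by
  unfold Spec_solution; infer_instance

-- ===== CLAIM (what is proved, stated in full; the proofs are below) =====
def Claim_equal_solution : Prop :=
  ∀ (land : List (List Int)), Dom_solution land → Pre_solution land →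
    Spec_solution land (solution land)

-- ===== LEMMAS AND PROOFS =====
-- ======== proof-side definitions ========
def inW (N M : Nat) (i j : Int) : Prop :=
  0 ≤ i ∧ i < (N : Int) ∧ 0 ≤ j ∧ j < (M : Int)

def gshape (N M : Nat) (g : List (List Int)) : Prop :=
  g.length = N ∧ ∀ row ∈ g, row.length = M

theorem gshape_set {N M : Nat} {g : List (List Int)} {i j v : Int}
    (h : gshape N M g) (hw : inW N M i j) : gshape N M (gridSet g i j v) := by
  obtain ⟨hl, hr⟩ := h
  obtain ⟨hi1, hi2, hj1, hj2⟩ := hw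
  have hilt : i.toNat < g.length := by omega
  unfold gridSet
  rw [PySem.List.pySetD_of_nonneg _ _ hi1, PySem.List.pySetD_of_nonneg _ _ hj1]
  refine ⟨by simpa using hl, ?_⟩
  intro row hrow
  rcases List.mem_or_eq_of_mem_set hrow with h' | h'
  · exact hr _ h'
  · subst h'
    rw [PySem.List.pyGetD_of_nonneg _ _ hi1]
    simp only [List.length_set, List.getD_eq_getElem?_getD, List.getElem?_eq_getElem hilt,
      Option.getD_some]
    exact hr _ (List.getElem_mem hilt)

theorem gridGet_eq_getD {g : List (List Int)} {i j : Int}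
    (h1 : 0 ≤ i) (h3 : 0 ≤ j) :
    gridGet g i j = (g.getD i.toNat []).getD j.toNat 0 := by
  simp only [gridGet]
  rw [PySem.List.pyGetD_of_nonneg _ _ h1, PySem.List.pyGetD_of_nonneg _ _ h3]

theorem gridGet_gridSet {N M : Nat} {g : List (List Int)} {i j x y v : Int}
    (h : gshape N M g) (hij : inW N M i j) (hxy : inW N M x y) :
    gridGet (gridSet g i j v) x y = if x = i ∧ y = j then v else gridGet g x y := by
  obtain ⟨hl, hr⟩ := h
  obtain ⟨hi1, hi2, hj1, hj2⟩ := hij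
  obtain ⟨hx1, hx2, hy1, hy2⟩ := hxy
  have hilt : i.toNat < g.length := by omega
  have hxlt : x.toNat < g.length := by omega
  have hrowlen : ∀ (k : Nat) (hk : k < g.length), g[k].length = M := fun k hk =>
    hr _ (List.getElem_mem hk)
  have hrowi : g.getD i.toNat [] = g[i.toNat] := by
    rw [List.getD_eq_getElem?_getD, List.getElem?_eq_getElem hilt, Option.getD_some]
  have hrowM : (g.getD i.toNat []).length = M := by rw [hrowi]; exact hrowlen _ hilt
  have hgrid : gridSet g i j v = g.set i.toNat ((g.getD i.toNat []).set j.toNat v) := by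
    simp only [gridSet]
    rw [PySem.List.pySetD_of_nonneg _ _ hj1, PySem.List.pySetD_of_nonneg _ _ hi1,
      PySem.List.pyGetD_of_nonneg _ _ hi1]
  by_cases hxi : x = i
  · subst hxi
    have houter : (g.set x.toNat ((g.getD x.toNat []).set j.toNat v)).getD x.toNat []
        = (g.getD x.toNat []).set j.toNat v := by
      rw [List.getD_eq_getElem?_getD, List.getElem?_set_self (by simpa using hxlt),
        Option.getD_some]
    rw [gridGet_eq_getD hx1 hy1, hgrid, houter]
    by_cases hyj : y = j
    · subst hyj
      have hv : ((g.getD x.toNat []).set y.toNat v).getD y.toNat 0 = v := by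
        rw [List.getD_eq_getElem?_getD, List.getElem?_set_self (by rw [hrowM]; omega),
          Option.getD_some]
      rw [hv]; simp
    · have hne : j.toNat ≠ y.toNat := by omega
      have hv : ((g.getD x.toNat []).set j.toNat v).getD y.toNat 0
          = (g.getD x.toNat []).getD y.toNat 0 := by
        rw [List.getD_eq_getElem?_getD, List.getElem?_set_ne hne, ← List.getD_eq_getElem?_getD]
      rw [hv, gridGet_eq_getD hx1 hy1]
      simp [hyj]
  · have hne : i.toNat ≠ x.toNat := by omega
    have houter : (g.set i.toNat ((g.getD i.toNat []).set j.toNat v)).getD x.toNat []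
        = g.getD x.toNat [] := by
      rw [List.getD_eq_getElem?_getD, List.getElem?_set_ne hne, ← List.getD_eq_getElem?_getD]
    rw [gridGet_eq_getD hx1 hy1, hgrid, houter, gridGet_eq_getD hx1 hy1]
    simp [hxi]

theorem isvalid_iff {N M : Nat} {n m x y : Int} (hn : n = (N : Int)) (hm : m = (M : Int)) :
    isvalid n m x y = true ↔ inW N M x y := by
  subst hn hm
  simp [isvalid, inW, and_assoc]

-- ======== relating A's deque BFS to B's scan-pointer flood fill ========
def tagged (t : Int) (cs : List (Int × Int)) : List (Int × Int × Int) :=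
  cs.map (fun p => (p.1, p.2, t))

def marksOf (N M : Nat) (S : List (Int × Int)) (v : List (List Int)) : Prop :=
  ∀ i j : Int, inW N M i j → gridGet v i j = if (i, j) ∈ S then 1 else 0

theorem nbrs_eq_map (x y : Int) : nbrs x y = dirs.map (fun d => (x + d.1, y + d.2)) := by
  simp [nbrs, dirs]
  omega

-- joint simulation of one neighbour sweep: A's fold over dirs from (dqA, visited, loc, size)
-- against B's fold over the neighbour list from (cells, seen)
theorem grow_fold_sim {land : List (List Int)} {N M : Nat} {n m : Int}
    (hn : n = (N : Int)) (hm : m = (M : Int)) (S : List (Int × Int)) (t cx cy : Int)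
    (loc0 : List (Int × Int × Int)) (size0 : Int) :
    ∀ (ds : List (Int × Int)) (dqA cells : List (Int × Int)) (visited : List (List Int))
      (seen : PySem.Set (Int × Int)),
    gshape N M visited →
    marksOf N M (S ++ cells) visited →
    (∀ p, p ∈ seen ↔ p ∈ S ++ cells) →
    (S ++ cells).Nodup →
    (∀ p ∈ cells, inW N M p.1 p.2 ∧ gridGet land p.1 p.2 ≠ 0) →
    ∃ (new : List (Int × Int)) (V' : List (List Int)) (seen' : PySem.Set (Int × Int)),
      (ds.map (fun d => (cx + d.1, cy + d.2))).foldl (growStep land n m) (cells, seen)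
        = (cells ++ new, seen') ∧
      ds.foldl (stepA land n m t cx cy)
          (dqA, visited, loc0 ++ tagged t cells, size0 + (cells.length : Int))
        = (dqA ++ new, V', loc0 ++ tagged t (cells ++ new),
           size0 + ((cells ++ new).length : Int)) ∧
      gshape N M V' ∧ marksOf N M (S ++ (cells ++ new)) V' ∧
      (∀ p, p ∈ seen' ↔ p ∈ S ++ (cells ++ new)) ∧ (S ++ (cells ++ new)).Nodup ∧
      (∀ p ∈ cells ++ new, inW N M p.1 p.2 ∧ gridGet land p.1 p.2 ≠ 0) := by
  intro ds
  induction ds with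
  | nil =>
    intro dqA cells visited seen hsh hmk hseen hnd hcell
    exact ⟨[], visited, seen, by simp, by simp, by simpa using hsh, by simpa using hmk,
      by simpa using hseen, by simpa using hnd, by simpa using hcell⟩
  | cons d ds ih =>
    intro dqA cells visited seen hsh hmk hseen hnd hcell
    simp only [List.map_cons, List.foldl_cons, stepA, growStep]
    have hla : landAt land (cx + d.1, cy + d.2) = gridGet land (cx + d.1) (cy + d.2) := rfl
    have hiv : (decide (0 ≤ (cx + d.1, cy + d.2).1) && decide ((cx + d.1, cy + d.2).1 < n) &&
        decide (0 ≤ (cx + d.1, cy + d.2).2) && decide ((cx + d.1, cy + d.2).2 < m))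
        = isvalid n m (cx + d.1) (cy + d.2) := rfl
    by_cases h1 : (isvalid n m (cx + d.1) (cy + d.2) && !(gridGet land (cx + d.1) (cy + d.2) == 0)) = true
    · rw [if_pos h1]
      obtain ⟨ha, hb⟩ : isvalid n m (cx + d.1) (cy + d.2) = true ∧
          ¬ gridGet land (cx + d.1) (cy + d.2) = 0 := by simpa using h1
      have hqw : inW N M (cx + d.1) (cy + d.2) := (isvalid_iff hn hm).mp ha
      by_cases h2 : (gridGet visited (cx + d.1) (cy + d.2) == 0) = true
      · -- fresh cell: both sides append it
        rw [if_pos h2]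
        have hq0 : gridGet visited (cx + d.1) (cy + d.2) = 0 := by simpa using h2
        have hqnot : (cx + d.1, cy + d.2) ∉ S ++ cells := by
          intro hmem
          have := hmk (cx + d.1) (cy + d.2) hqw
          rw [hq0, if_pos hmem] at this
          exact absurd this (by norm_num)
        have hcont : PySem.Set.contains seen (cx + d.1, cy + d.2) = false := by
          rw [Bool.eq_false_iff]
          intro hc
          exact hqnot ((hseen _).mp ((PySem.Set.contains_iff _ _).mp hc))
        rw [if_pos (by
          rw [hiv, hla, hcont]
          simp [ha, hb])]
        have e1 : loc0 ++ tagged t cells ++ [(cx + d.1, cy + d.2, t)]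
            = loc0 ++ tagged t (cells ++ [(cx + d.1, cy + d.2)]) := by
          simp [tagged]
        have e2 : size0 + (cells.length : Int) + 1
            = size0 + (((cells ++ [(cx + d.1, cy + d.2)]).length : Nat) : Int) := by
          simp; ring
        rw [e1, e2]
        have hmk' : marksOf N M (S ++ (cells ++ [(cx + d.1, cy + d.2)]))
            (gridSet visited (cx + d.1) (cy + d.2) 1) := by
          intro i j hij
          rw [gridGet_gridSet hsh hqw hij]
          by_cases he : i = cx + d.1 ∧ j = cy + d.2
          · have hmem : (i, j) ∈ S ++ (cells ++ [(cx + d.1, cy + d.2)]) := by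
              simp [he.1, he.2]
            rw [if_pos he, if_pos hmem]
          · have hne : (i, j) ≠ (cx + d.1, cy + d.2) := by
              intro hc
              exact he ⟨congrArg Prod.fst hc, congrArg Prod.snd hc⟩
            have hmem : ((i, j) ∈ S ++ (cells ++ [(cx + d.1, cy + d.2)]))
                ↔ ((i, j) ∈ S ++ cells) := by simp [hne]
            rw [if_neg he, hmk i j hij]
            congr 1
            simp [hmem]
        have hseen' : ∀ p, p ∈ PySem.Set.add seen (cx + d.1, cy + d.2)
            ↔ p ∈ S ++ (cells ++ [(cx + d.1, cy + d.2)]) := by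
          intro p
          rw [PySem.Set.mem_add, hseen p]
          simp [or_assoc]
        have hnd' : (S ++ (cells ++ [(cx + d.1, cy + d.2)])).Nodup := by
          rw [← List.append_assoc]
          refine List.Nodup.append hnd (List.nodup_singleton _) ?_
          intro a haa hbb
          rw [List.mem_singleton] at hbb
          subst hbb
          exact hqnot haa
        have hcell' : ∀ p ∈ cells ++ [(cx + d.1, cy + d.2)],
            inW N M p.1 p.2 ∧ gridGet land p.1 p.2 ≠ 0 := by
          intro p hp
          rcases List.mem_append.mp hp with hp | hp
          · exact hcell p hp
          · rw [List.mem_singleton] at hp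
            subst hp
            exact ⟨hqw, hb⟩
        obtain ⟨new', V', seen', eB, eA, c1, c2, c3, c4, c5⟩ :=
          ih (dqA ++ [(cx + d.1, cy + d.2)]) (cells ++ [(cx + d.1, cy + d.2)])
            (gridSet visited (cx + d.1) (cy + d.2) 1)
            (PySem.Set.add seen (cx + d.1, cy + d.2))
            (gshape_set hsh hqw) hmk' hseen' hnd' hcell'
        refine ⟨(cx + d.1, cy + d.2) :: new', V', seen', ?_, ?_, c1, ?_, ?_, ?_, ?_⟩
        · rw [eB]; simp
        · rw [eA]; simp
        · simpa [List.append_assoc] using c2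
        · intro p; simpa [List.append_assoc] using c3 p
        · simpa [List.append_assoc] using c4
        · intro p hp
          exact c5 p (by simpa [List.append_assoc] using hp)
      · -- already visited: both sides skip
        rw [if_neg h2]
        have hmem : (cx + d.1, cy + d.2) ∈ S ++ cells := by
          by_contra hmm
          have := hmk (cx + d.1) (cy + d.2) hqw
          rw [if_neg hmm] at this
          exact h2 (by simp [this])
        have hcont : PySem.Set.contains seen (cx + d.1, cy + d.2) = true :=
          (PySem.Set.contains_iff _ _).mpr ((hseen _).mpr hmem)
        rw [if_neg (by rw [hiv, hla, hcont]; simp)]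
        exact ih dqA cells visited seen hsh hmk hseen hnd hcell
    · -- out of bounds or water: both sides skip
      rw [if_neg h1]
      have h1' : (isvalid n m (cx + d.1) (cy + d.2) && !(gridGet land (cx + d.1) (cy + d.2) == 0)) = false :=
        Bool.eq_false_iff.mpr h1
      rw [if_neg (by
        rw [hiv, hla]
        simp [h1'])]
      exact ih dqA cells visited seen hsh hmk hseen hnd hcell

-- joint simulation of the two component loops themselves
theorem flood_sim {land : List (List Int)} {N M : Nat} {n m : Int}
    (hn : n = (N : Int)) (hm : m = (M : Int)) (t : Int)
    (loc0 : List (Int × Int × Int)) (size0 : Int) (S : List (Int × Int)) :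
    ∀ (fuel : Nat) (cells : List (Int × Int)) (kn : Nat)
      (seen : PySem.Set (Int × Int)) (visited : List (List Int)),
    gshape N M visited →
    marksOf N M (S ++ cells) visited →
    (∀ p, p ∈ seen ↔ p ∈ S ++ cells) →
    (S ++ cells).Nodup →
    (∀ p ∈ cells, inW N M p.1 p.2 ∧ gridGet land p.1 p.2 ≠ 0) →
    ∃ (new : List (Int × Int)) (V' : List (List Int)) (seen' : PySem.Set (Int × Int)),
      flood land n m fuel cells ((kn : Nat) : Int) seen = (cells ++ new, seen') ∧
      bfsA land n m t fuel (cells.drop kn) visited (loc0 ++ tagged t cells)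
          (size0 + (cells.length : Int))
        = (V', loc0 ++ tagged t (cells ++ new), size0 + ((cells ++ new).length : Int)) ∧
      gshape N M V' ∧ marksOf N M (S ++ (cells ++ new)) V' ∧
      (∀ p, p ∈ seen' ↔ p ∈ S ++ (cells ++ new)) ∧ (S ++ (cells ++ new)).Nodup ∧
      (∀ p ∈ cells ++ new, inW N M p.1 p.2 ∧ gridGet land p.1 p.2 ≠ 0) := by
  intro fuel
  induction fuel with
  | zero =>
    intro cells kn seen visited hsh hmk hseen hnd hcell
    exact ⟨[], visited, seen, by simp [flood], by simp [bfsA], by simpa using hsh,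
      by simpa using hmk, by simpa using hseen, by simpa using hnd, by simpa using hcell⟩
  | succ fuel ihf =>
    intro cells kn seen visited hsh hmk hseen hnd hcell
    by_cases hk : kn < cells.length
    · -- pointer still inside the list = A's deque nonempty
      have hdrop : cells.drop kn = cells[kn] :: cells.drop (kn + 1) :=
        List.drop_eq_getElem_cons hk
      have hget : PySem.List.pyGetD cells ((kn : Nat) : Int) (0, 0) = cells[kn] := by
        rw [PySem.List.pyGetD_natCast, List.getD_eq_getElem?_getD,
          List.getElem?_eq_getElem hk, Option.getD_some]
      rcases hq : cells[kn] with ⟨cx, cy⟩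
      obtain ⟨new1, V1, seen1, eB, eA, c1, c2, c3, c4, c5⟩ :=
        grow_fold_sim hn hm S t cx cy loc0 size0 dirs (cells.drop (kn + 1)) cells visited seen
          hsh hmk hseen hnd hcell
      have hflood : flood land n m (fuel + 1) cells ((kn : Nat) : Int) seen
          = flood land n m fuel (cells ++ new1) (((kn + 1 : Nat) : Nat) : Int) seen1 := by
        rw [flood, if_pos (by
          rw [PySem.List.len_eq]
          simp
          exact_mod_cast hk), hget, hq]
        rw [← nbrs_eq_map] at eB
        show flood land n m fuel
            ((nbrs cx cy).foldl (growStep land n m) (cells, seen)).1 (((kn : Nat) : Int) + 1)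
            ((nbrs cx cy).foldl (growStep land n m) (cells, seen)).2 = _
        rw [eB]
        norm_num
      have hbfs : bfsA land n m t (fuel + 1) (cells.drop kn) visited (loc0 ++ tagged t cells)
            (size0 + (cells.length : Int))
          = bfsA land n m t fuel ((cells ++ new1).drop (kn + 1)) V1
            (loc0 ++ tagged t (cells ++ new1)) (size0 + ((cells ++ new1).length : Int)) := by
        rw [hdrop, hq]
        show bfsA land n m t fuel
            (dirs.foldl (stepA land n m t cx cy)
              (cells.drop (kn + 1), visited, loc0 ++ tagged t cells,
                size0 + (cells.length : Int))).1 _ _ _ = _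
        rw [eA]
        have hdd : (cells ++ new1).drop (kn + 1) = cells.drop (kn + 1) ++ new1 := by
          exact List.drop_append_of_le_length (by omega)
        rw [hdd]
      obtain ⟨new2, V', seen', fB, fA, d1, d2, d3, d4, d5⟩ :=
        ihf (cells ++ new1) (kn + 1) seen1 V1 c1 c2 c3 c4 c5
      refine ⟨new1 ++ new2, V', seen', ?_, ?_, d1, ?_, ?_, ?_, ?_⟩
      · rw [hflood, fB]; simp
      · rw [hbfs, fA]; simp
      · simpa [List.append_assoc] using d2
      · intro p; simpa [List.append_assoc] using d3 p
      · simpa [List.append_assoc] using d4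
      · intro p hp
        exact d5 p (by simpa [List.append_assoc] using hp)
    · -- pointer ran off the end = A's deque empty: both loops stop
      have hdrop : cells.drop kn = [] := List.drop_eq_nil_of_le (by omega)
      refine ⟨[], visited, seen, ?_, ?_, by simpa using hsh, by simpa using hmk,
        by simpa using hseen, by simpa using hnd, by simpa using hcell⟩
      · rw [flood, if_neg (by
          rw [PySem.List.len_eq]
          simp
          exact_mod_cast Nat.le_of_not_lt hk)]
        simp
      · rw [hdrop]
        simp [bfsA]

-- ======== outer loop: nested fold as a fold over the cell list ========
theorem foldl_nested_pairs {σ : Type} (l1 l2 : List Int) (f : σ → Int × Int → σ) (init : σ) :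
    l1.foldl (fun s i => l2.foldl (fun s j => f s (i, j)) s) init
      = (l1.flatMap (fun i => l2.map (fun j => (i, j)))).foldl f init := by
  induction l1 generalizing init with
  | nil => rfl
  | cons a l1 ih =>
    simp only [List.flatMap_cons, List.foldl_append, List.foldl_map, List.foldl_cons]
    rw [ih]

-- ======== ghost component lists ========
def locOfFrom (k : Nat) : List (List (Int × Int)) → List (Int × Int × Int)
  | [] => []
  | b :: bs => tagged ((k : Int)) b ++ locOfFrom (k + 1) bs

def sizesOfFrom (k : Nat) : List (List (Int × Int)) → List (Int × Int)
  | [] => []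
  | b :: bs => ((k : Int), (b.length : Int)) :: sizesOfFrom (k + 1) bs

def colsOf (b : List (Int × Int)) : List Int := b.map (fun p => p.2)

def colSpec (blocks : List (List (Int × Int))) (c : Int) : Int :=
  (blocks.map (fun b => if c ∈ colsOf b then (b.length : Int) else 0)).sum

theorem locOfFrom_append (cells : List (Int × Int)) :
    ∀ (bs : List (List (Int × Int))) (k : Nat),
    locOfFrom k (bs ++ [cells]) = locOfFrom k bs ++ tagged (((k + bs.length : Nat)) : Int) cells := by
  intro bs
  induction bs with
  | nil => intro k; simp [locOfFrom]
  | cons b bs ih =>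
    intro k
    simp only [List.cons_append, locOfFrom, ih (k + 1), List.append_assoc]
    have h2 : (k + 1 + bs.length) = (k + (b :: bs).length) := by simp; omega
    rw [h2]

theorem sizesOfFrom_append (cells : List (Int × Int)) :
    ∀ (bs : List (List (Int × Int))) (k : Nat),
    sizesOfFrom k (bs ++ [cells])
      = sizesOfFrom k bs ++ [(((k + bs.length : Nat) : Int), (cells.length : Int))] := by
  intro bs
  induction bs with
  | nil => intro k; simp [sizesOfFrom]
  | cons b bs ih =>
    intro k
    simp only [List.cons_append, sizesOfFrom, ih (k + 1)]
    have h2 : (k + 1 + bs.length) = (k + (b :: bs).length) := by simp; omega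
    rw [h2]

theorem colSpec_append (blocks : List (List (Int × Int))) (cells : List (Int × Int)) (c : Int) :
    colSpec (blocks ++ [cells]) c
      = colSpec blocks c + (if c ∈ colsOf cells then (cells.length : Int) else 0) := by
  simp [colSpec]

-- the 'col_total[c] = col_total.get(c, 0) + size' loop over distinct columns
theorem dict_addsize (size : Int) :
    ∀ (cols : List Int) (d : PySem.Dict Int Int), cols.Nodup →
    ∀ c : Int, (cols.foldl (fun d c => d.insert c (d.getD c 0 + size)) d).getD c 0
      = d.getD c 0 + (if c ∈ cols then size else 0) := by
  intro cols
  induction cols with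
  | nil => intro d _ c; simp
  | cons c0 rest ih =>
    intro d hnd c
    obtain ⟨hc0, hrest⟩ := List.nodup_cons.mp hnd
    rw [List.foldl_cons, ih _ hrest c, PySem.Dict.getD_insert]
    by_cases he : c = c0
    · subst he
      rw [if_pos rfl, if_neg hc0, if_pos (List.mem_cons_self)]
      ring
    · rw [if_neg he]
      by_cases hr : c ∈ rest
      · rw [if_pos hr, if_pos (List.mem_cons_of_mem _ hr)]
      · rw [if_neg hr, if_neg (by simp [he, hr])]

-- ======== joint invariant of the two outer loops ========
def SInv (land : List (List Int)) (N M : Nat)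
    (stA : List (List Int) × List (Int × Int) × List (Int × Int × Int) × Int)
    (stB : PySem.Set (Int × Int) × PySem.Dict Int Int)
    (blocks : List (List (Int × Int))) : Prop :=
  gshape N M stA.1 ∧
  stA.2.2.2 = (blocks.length : Int) + 1 ∧
  stA.2.1 = sizesOfFrom 1 blocks ∧
  stA.2.2.1 = locOfFrom 1 blocks ∧
  marksOf N M blocks.flatten stA.1 ∧
  (∀ p, p ∈ stB.1 ↔ p ∈ blocks.flatten) ∧
  blocks.flatten.Nodup ∧
  (∀ p ∈ blocks.flatten, inW N M p.1 p.2 ∧ gridGet land p.1 p.2 ≠ 0) ∧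
  (∀ b ∈ blocks, b ≠ []) ∧
  (PySem.Dict.keys stB.2).Nodup ∧
  (∀ c : Int, c ∈ PySem.Dict.keys stB.2 ↔ ∃ b ∈ blocks, c ∈ colsOf b) ∧
  (∀ c : Int, PySem.Dict.getD stB.2 c 0 = colSpec blocks c)

theorem cell_step {land : List (List Int)} {N M : Nat} {n m : Int}
    (hn : n = (N : Int)) (hm : m = (M : Int)) (fuel : Nat) (ij : Int × Int)
    (stA : List (List Int) × List (Int × Int) × List (Int × Int × Int) × Int)
    (stB : PySem.Set (Int × Int) × PySem.Dict Int Int) (blocks : List (List (Int × Int)))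
    (hw : inW N M ij.1 ij.2) (h : SInv land N M stA stB blocks) :
    ∃ blocks', SInv land N M (cellA land n m fuel stA ij) (visitCell land n m fuel stB ij) blocks' ∧
      (∃ pre, blocks' = blocks ++ pre) ∧
      (gridGet land ij.1 ij.2 ≠ 0 → ij ∈ blocks'.flatten) := by
  obtain ⟨hsh, ht, hsz, hloc, hmk, hseen, hnd, hprops, hnonnil, hknd, hkeys, hgetd⟩ := h
  obtain ⟨a, b⟩ := ij
  simp only at hw
  have hla : landAt land (a, b) = gridGet land a b := rfl
  simp only [cellA, visitCell, hla]
  by_cases hland : gridGet land a b = 0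
  · -- water: both skip
    rw [if_neg (by simp [hland]), if_neg (by simp [hland])]
    exact ⟨blocks, ⟨hsh, ht, hsz, hloc, hmk, hseen, hnd, hprops, hnonnil, hknd, hkeys, hgetd⟩,
      ⟨[], by simp⟩, fun hc => absurd hland hc⟩
  · have hvq := hmk a b hw
    by_cases hmem : (a, b) ∈ blocks.flatten
    · -- already discovered: both skip
      rw [if_pos hmem] at hvq
      have hmemB : (a, b) ∈ stB.1 := (hseen _).mpr hmem
      rw [if_neg (by simp [hvq]), if_neg (by simp [hmemB])]
      exact ⟨blocks, ⟨hsh, ht, hsz, hloc, hmk, hseen, hnd, hprops, hnonnil, hknd, hkeys, hgetd⟩,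
        ⟨[], by simp⟩, fun _ => hmem⟩
    · -- new component: run both searches through the simulation
      rw [if_neg hmem] at hvq
      have hmemB : (a, b) ∉ stB.1 := fun hc => hmem ((hseen _).mp hc)
      rw [if_pos (by simp [hland, hvq]), if_pos (by simp [hland, hmemB])]
      have hmk1 : marksOf N M (blocks.flatten ++ [(a, b)]) (gridSet stA.1 a b 1) := by
        intro i j hij
        rw [gridGet_gridSet hsh hw hij]
        by_cases he : i = a ∧ j = b
        · have hm2 : (i, j) ∈ blocks.flatten ++ [(a, b)] := by simp [he.1, he.2]
          rw [if_pos he, if_pos hm2]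
        · have hne : (i, j) ≠ (a, b) := by
            intro hc
            exact he ⟨congrArg Prod.fst hc, congrArg Prod.snd hc⟩
          rw [if_neg he, hmk i j hij]
          have hiff : ((i, j) ∈ blocks.flatten ++ [(a, b)]) ↔ ((i, j) ∈ blocks.flatten) := by
            simp [hne]
          simp only [hiff]
      have hseen1 : ∀ p, p ∈ PySem.Set.add stB.1 (a, b) ↔ p ∈ blocks.flatten ++ [(a, b)] := by
        intro p
        rw [PySem.Set.mem_add, hseen p]
        simp
      have hnd1 : (blocks.flatten ++ [(a, b)]).Nodup := by
        refine List.Nodup.append hnd (List.nodup_singleton _) ?_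
        intro p hp hp'
        rw [List.mem_singleton] at hp'
        subst hp'
        exact hmem hp
      have hcell1 : ∀ p ∈ ([(a, b)] : List (Int × Int)),
          inW N M p.1 p.2 ∧ gridGet land p.1 p.2 ≠ 0 := by
        intro p hp
        rw [List.mem_singleton] at hp
        subst hp
        exact ⟨hw, hland⟩
      obtain ⟨new, V', seen', eB, eA, c1, c2, c3, c4, c5⟩ :=
        flood_sim hn hm stA.2.2.2 stA.2.2.1 0 blocks.flatten fuel [(a, b)] 0
          (PySem.Set.add stB.1 (a, b)) (gridSet stA.1 a b 1)
          (gshape_set hsh hw) hmk1 hseen1 hnd1 hcell1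
      have e0 : ((0 : Nat) : Int) = (0 : Int) := by norm_num
      rw [e0] at eB
      have eA' : bfsA land n m stA.2.2.2 fuel [(a, b)] (gridSet stA.1 a b 1)
            (stA.2.2.1 ++ [(a, b, stA.2.2.2)]) 1
          = (V', stA.2.2.1 ++ tagged stA.2.2.2 ((a, b) :: new),
             (0 : Int) + ((((a, b) :: new).length : Nat) : Int)) := by
        have h1 : ([(a, b)] : List (Int × Int)).drop 0 = [(a, b)] := rfl
        have h2 : stA.2.2.1 ++ tagged stA.2.2.2 [(a, b)] = stA.2.2.1 ++ [(a, b, stA.2.2.2)] := by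
          simp [tagged]
        have h3 : (0 : Int) + ((([(a, b)] : List (Int × Int)).length : Nat) : Int) = 1 := by simp
        have := eA
        rw [h1, h2, h3] at this
        simpa using this
      rw [eB, eA']
      -- the freshly found component
      refine ⟨blocks ++ [(a, b) :: new], ⟨c1, ?_, ?_, ?_, ?_, ?_, ?_, ?_, ?_, ?_, ?_, ?_⟩,
        ⟨[(a, b) :: new], rfl⟩, fun _ => by simp⟩
      · simp only [List.length_append, List.length_singleton]
        rw [ht]
        push_cast
        ring
      · simp only [hsz]
        rw [sizesOfFrom_append,
          show ((1 + blocks.length : Nat) : Int) = stA.2.2.2 from by rw [ht]; push_cast; ring]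
        norm_num
      · rw [hloc, locOfFrom_append,
          show ((1 + blocks.length : Nat) : Int) = stA.2.2.2 from by rw [ht]; push_cast; ring]
      · intro i j hij
        rw [c2 i j hij]
        simp [List.flatten_append]
      · intro p
        rw [c3 p]
        simp [List.flatten_append]
      · simp only [List.flatten_append, List.flatten_cons, List.flatten_nil, List.append_nil]
        exact c4
      · intro p hp
        simp only [List.flatten_append, List.flatten_cons, List.flatten_nil, List.append_nil] at hp
        rcases List.mem_append.mp hp with hp | hp
        · exact hprops p hp
        · exact c5 p hp
      · intro bl hbl
        rcases List.mem_append.mp hbl with hbl | hbl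
        · exact hnonnil bl hbl
        · rw [List.mem_singleton] at hbl
          subst hbl
          simp
      · rw [PySem.Dict.keys_foldl_insert]
        exact PySem.Set.nodup_update _ _ hknd
      · intro c
        rw [PySem.Dict.keys_foldl_insert, PySem.Set.mem_update, hkeys c,
          PySem.Set.mem_ofList]
        constructor
        · rintro (⟨bb, hb1, hb2⟩ | hc)
          · exact ⟨bb, by simp [hb1], hb2⟩
          · exact ⟨(a, b) :: new, by simp, by simpa [colsOf] using hc⟩
        · rintro ⟨bb, hb1, hb2⟩
          rcases List.mem_append.mp hb1 with hb1 | hb1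
          · exact Or.inl ⟨bb, hb1, hb2⟩
          · rw [List.mem_singleton] at hb1
            subst hb1
            exact Or.inr (by simpa [colsOf] using hb2)
      · intro c
        have hred : (([(a, b)] ++ new, seen').1 : List (Int × Int)) = (a, b) :: new := rfl
        rw [dict_addsize _ _ stB.2 (PySem.Set.nodup_ofList _) c, hgetd c, colSpec_append]
        congr 1
        rw [hred]
        by_cases hcc : c ∈ colsOf ((a, b) :: new)
        · rw [if_pos hcc, if_pos (by
            rw [PySem.Set.mem_ofList]
            exact hcc), PySem.List.len_eq]
        · rw [if_neg hcc, if_neg (by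
            rw [PySem.Set.mem_ofList]
            exact hcc)]

theorem scan_fold {land : List (List Int)} {N M : Nat} {n m : Int}
    (hn : n = (N : Int)) (hm : m = (M : Int)) (fuel : Nat) :
    ∀ (ps : List (Int × Int))
      (stA : List (List Int) × List (Int × Int) × List (Int × Int × Int) × Int)
      (stB : PySem.Set (Int × Int) × PySem.Dict Int Int) (blocks : List (List (Int × Int))),
    (∀ p ∈ ps, inW N M p.1 p.2) → SInv land N M stA stB blocks →
    ∃ blocks', SInv land N M (ps.foldl (cellA land n m fuel) stA)
        (ps.foldl (visitCell land n m fuel) stB) blocks' ∧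
      (∃ pre, blocks' = blocks ++ pre) ∧
      ∀ p ∈ ps, gridGet land p.1 p.2 ≠ 0 → p ∈ blocks'.flatten := by
  intro ps
  induction ps with
  | nil => intro stA stB blocks _ h; exact ⟨blocks, h, ⟨[], by simp⟩, by simp⟩
  | cons p ps ih =>
    intro stA stB blocks hwin h
    obtain ⟨blocks1, h1, ⟨pre1, hpre1⟩, hmem1⟩ :=
      cell_step hn hm fuel p stA stB blocks (hwin p (by simp)) h
    obtain ⟨blocks2, h2, ⟨pre2, hpre2⟩, hmem2⟩ :=
      ih _ _ blocks1 (fun q hq => hwin q (by simp [hq])) h1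
    refine ⟨blocks2, h2, ⟨pre1 ++ pre2, by rw [hpre2, hpre1, List.append_assoc]⟩, ?_⟩
    intro q hq hl
    rcases List.mem_cons.mp hq with hq | hq
    · subst hq
      have := hmem1 hl
      rw [hpre2, List.flatten_append]
      exact List.mem_append.mpr (Or.inl this)
    · exact hmem2 q hq hl

-- ======== the overwrite pass: final visited values ========
theorem write_fold_untouched {N M : Nat} (w : Int × Int × Int → Int) :
    ∀ (es : List (Int × Int × Int)) (v : List (List Int)) (x y : Int), gshape N M v →
    (∀ e ∈ es, inW N M e.1 e.2.1) → inW N M x y →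
    (∀ e ∈ es, ¬(e.1 = x ∧ e.2.1 = y)) →
    gridGet (es.foldl (fun v e => gridSet v e.1 e.2.1 (w e)) v) x y = gridGet v x y := by
  intro es
  induction es with
  | nil => intro v x y _ _ _ _; rfl
  | cons f es ih =>
    intro v x y h hwin hxy hun
    rw [List.foldl_cons, ih _ x y (gshape_set h (hwin f (by simp)))
      (fun e he => hwin e (by simp [he])) hxy (fun e he => hun e (by simp [he]))]
    rw [gridGet_gridSet h (hwin f (by simp)) hxy]
    rw [if_neg (by
      intro hc
      exact hun f (by simp) ⟨hc.1.symm, hc.2.symm⟩)]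

theorem write_fold_value {N M : Nat} (w : Int × Int × Int → Int) :
    ∀ (es : List (Int × Int × Int)) (v : List (List Int)), gshape N M v →
    (∀ e ∈ es, inW N M e.1 e.2.1) →
    (es.map (fun e => (e.1, e.2.1))).Nodup →
    ∀ e ∈ es, gridGet (es.foldl (fun v e => gridSet v e.1 e.2.1 (w e)) v) e.1 e.2.1 = w e := by
  intro es
  induction es with
  | nil => intro v _ _ _ e he; cases he
  | cons f es ih =>
    intro v h hwin hnd e he
    have hfw : inW N M f.1 f.2.1 := hwin f (by simp)
    have hsh' : gshape N M (gridSet v f.1 f.2.1 (w f)) := gshape_set h hfw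
    rcases List.mem_cons.mp he with he | he
    · subst he
      rw [List.foldl_cons]
      rw [write_fold_untouched w es _ e.1 e.2.1 hsh' (fun e' he' => hwin e' (by simp [he'])) hfw ?fresh]
      case fresh =>
        intro e' he' hc
        have : (e'.1, e'.2.1) ∈ es.map (fun e => (e.1, e.2.1)) := List.mem_map.mpr ⟨e', he', rfl⟩
        rw [hc.1, hc.2] at this
        exact (List.nodup_cons.mp hnd).1 this
      rw [gridGet_gridSet h hfw hfw, if_pos ⟨rfl, rfl⟩]
    · rw [List.foldl_cons]
      exact ih _ hsh' (fun e' he' => hwin e' (by simp [he'])) (List.nodup_cons.mp hnd).2 e he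

-- ======== index-pair loops as structural chains ========
def pairChain {α β : Type} (F : β → α → α → β) : β → α → List α → β
  | acc, _, [] => acc
  | acc, prev, y :: ys => pairChain F (F acc prev y) y ys

theorem chain_aux {α β : Type} (F : β → α → α → β) (d : α) :
    ∀ (rest : List α) (pre : List α) (prev : α) (init : β),
    (PySem.List.pyRange ((pre.length : Int) + 1) ((pre.length : Int) + 1 + (rest.length : Int)) 1).foldl
      (fun acc i => F acc (PySem.List.pyGetD (pre ++ prev :: rest) (i - 1) d)
                          (PySem.List.pyGetD (pre ++ prev :: rest) i d)) init
    = pairChain F init prev rest := by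
  intro rest
  induction rest with
  | nil =>
    intro pre prev init
    rw [PySem.List.pyRange_one_eq_nil (by simp)]
    rfl
  | cons y ys ih =>
    intro pre prev init
    rw [PySem.List.pyRange_one_cons (by simp)]
    rw [List.foldl_cons]
    have hget1 : PySem.List.pyGetD (pre ++ prev :: y :: ys) ((pre.length : Int) + 1 - 1) d = prev := by
      have h0 : (pre.length : Int) + 1 - 1 = ((pre.length : Nat) : Int) := by ring
      rw [h0, PySem.List.pyGetD_natCast]
      simp [List.getD_eq_getElem?_getD]
    have hget2 : PySem.List.pyGetD (pre ++ prev :: y :: ys) ((pre.length : Int) + 1) d = y := by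
      have h0 : (pre.length : Int) + 1 = ((pre.length + 1 : Nat) : Int) := by push_cast; ring
      rw [h0, PySem.List.pyGetD_natCast]
      simp [List.getD_eq_getElem?_getD]
    rw [hget1, hget2]
    have hx : pre ++ prev :: y :: ys = (pre ++ [prev]) ++ y :: ys := by simp
    have hr : PySem.List.pyRange ((pre.length : Int) + 1 + 1)
          ((pre.length : Int) + 1 + ((y :: ys).length : Int)) 1
        = PySem.List.pyRange (((pre ++ [prev]).length : Int) + 1)
          (((pre ++ [prev]).length : Int) + 1 + ((ys.length : Int))) 1 := by
      congr 1 <;> (push_cast [List.length_append, List.length_cons, List.length_nil]; try omega)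
    rw [hx, hr]
    exact ih (pre ++ [prev]) y (F init prev y)

theorem chain_eq_fold {α β : Type} (F : β → α → α → β) (d : α) (x : α) (rest : List α) (init : β) :
    (PySem.List.pyRange 1 (PySem.List.len (x :: rest)) 1).foldl
      (fun acc i => F acc (PySem.List.pyGetD (x :: rest) (i - 1) d)
                          (PySem.List.pyGetD (x :: rest) i d)) init
    = pairChain F init x rest := by
  have h := chain_aux F d rest [] x init
  have e : PySem.List.len (x :: rest) = 1 + (rest.length : Int) := by
    simp [PySem.List.len_eq]
    ring
  rw [e]
  simpa using h

-- ======== stability of the sort: tags stay non-decreasing inside equal columns ========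
def LexCT (x y : Int × Int × Int) : Prop :=
  x.2.1 < y.2.1 ∨ (x.2.1 = y.2.1 ∧ x.2.2 ≤ y.2.2)

theorem insertBy_lex (x : Int × Int × Int) :
    ∀ acc, acc.Pairwise LexCT → (∀ y ∈ acc, y.2.2 ≤ x.2.2) →
    (PySem.List.insertBy (fun a b => decide (a.2.1 < b.2.1)) x acc).Pairwise LexCT := by
  intro acc
  induction acc with
  | nil => intro _ _; simp [PySem.List.insertBy]
  | cons y ys ih =>
    intro hp hall
    obtain ⟨hy, hys⟩ := List.pairwise_cons.mp hp
    simp only [PySem.List.insertBy]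
    by_cases hb : x.2.1 < y.2.1
    · rw [if_pos (by simpa using hb)]
      refine List.pairwise_cons.mpr ⟨?_, hp⟩
      intro z hz
      rcases List.mem_cons.mp hz with hz | hz
      · subst hz
        exact Or.inl hb
      · have := hy z hz
        left
        rcases this with h | h
        · omega
        · omega
    · rw [if_neg (by simpa using hb)]
      refine List.pairwise_cons.mpr ⟨?_, ih hys (fun z hz => hall z (by simp [hz]))⟩
      intro z hz
      rcases (PySem.List.mem_insertBy _ _ _ _).mp hz with hz | hz
      · subst hz
        rcases lt_or_eq_of_le (le_of_not_gt (by simpa using hb)) with h | h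
        · exact Or.inl h
        · exact Or.inr ⟨h, hall y (by simp)⟩
      · exact hy z hz

theorem sorted_stable_lex :
    ∀ (xs : List (Int × Int × Int)) (acc : List (Int × Int × Int)),
    acc.Pairwise LexCT → (∀ y ∈ acc, ∀ z ∈ xs, y.2.2 ≤ z.2.2) →
    xs.Pairwise (fun p q => p.2.2 ≤ q.2.2) →
    (xs.foldl (fun acc x => PySem.List.insertBy (fun a b => decide (a.2.1 < b.2.1)) x acc) acc).Pairwise LexCT := by
  intro xs
  induction xs with
  | nil => intro acc h _ _; exact h
  | cons x xs ih =>
    intro acc hacc hall hxs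
    obtain ⟨hx, hxs'⟩ := List.pairwise_cons.mp hxs
    rw [List.foldl_cons]
    apply ih _ (insertBy_lex x acc hacc (fun y hy => hall y hy x (by simp)))
    · intro y hy z hz
      rcases (PySem.List.mem_insertBy _ _ _ _).mp hy with hy | hy
      · subst hy
        exact hx z hz
      · exact hall y hy z (by simp [hz])
    · exact hxs'

theorem sorted_lex (xs : List (Int × Int × Int)) (h : xs.Pairwise (fun p q => p.2.2 ≤ q.2.2)) :
    (PySem.List.sorted xs (fun e => e.2.1) false).Pairwise LexCT := by
  rw [PySem.List.sorted_eq_foldl_insertBy]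
  exact sorted_stable_lex xs [] (by simp) (by simp) h

-- tags of locOfFrom are non-decreasing
theorem locOfFrom_tag_lb :
    ∀ (blocks : List (List (Int × Int))) (k : Nat) (e : Int × Int × Int),
    e ∈ locOfFrom k blocks → (k : Int) ≤ e.2.2 := by
  intro blocks
  induction blocks with
  | nil => intro k e he; cases he
  | cons b bs ih =>
    intro k e he
    rcases List.mem_append.mp he with he | he
    · obtain ⟨p, _, hpe⟩ := List.mem_map.mp he
      subst hpe
      simp
    · have := ih (k + 1) e he
      push_cast at this ⊢
      omega

theorem locOfFrom_tag_mono :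
    ∀ (blocks : List (List (Int × Int))) (k : Nat),
    (locOfFrom k blocks).Pairwise (fun p q => p.2.2 ≤ q.2.2) := by
  intro blocks
  induction blocks with
  | nil => intro k; exact List.Pairwise.nil
  | cons b bs ih =>
    intro k
    rw [locOfFrom, List.pairwise_append]
    refine ⟨?_, ih (k + 1), ?_⟩
    · have htriv : ∀ (l : List (Int × Int)), List.Pairwise (fun (_ _ : Int × Int) => True) l := by
        intro l
        induction l with
        | nil => exact .nil
        | cons x xs ih => exact .cons (fun _ _ => trivial) ih
      simp only [tagged, List.pairwise_map]
      simpa using htriv b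
    · intro p hp q hq
      obtain ⟨p', _, hpe⟩ := List.mem_map.mp hp
      subst hpe
      have := locOfFrom_tag_lb bs (k + 1) q hq
      push_cast at this ⊢
      omega

-- ======== runs of equal columns ========
def dE : Int × Int × Int := (0, 0, 0)

def groupRuns : List (Int × Int × Int) → List (List (Int × Int × Int))
  | [] => []
  | e :: rest =>
    match groupRuns rest with
    | [] => [[e]]
    | g :: gs => if (g.headD dE).2.1 = e.2.1 then (e :: g) :: gs else [e] :: g :: gs

theorem groupRuns_flatten : ∀ (L : List (Int × Int × Int)), (groupRuns L).flatten = L := by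
  intro L
  induction L with
  | nil => rfl
  | cons e rest ih =>
    cases hG : groupRuns rest with
    | nil =>
      rw [hG] at ih
      simp only [groupRuns, hG]
      simp at ih
      simp [ih]
    | cons g gs =>
      rw [hG] at ih
      simp only [groupRuns, hG]
      by_cases hc : ((g.headD dE).2.1 = e.2.1)
      · rw [if_pos hc]
        simp only [List.flatten_cons] at ih ⊢
        simp [ih]
      · rw [if_neg hc]
        simp only [List.flatten_cons] at ih ⊢
        simp [ih]

theorem groupRuns_ne : ∀ (L : List (Int × Int × Int)) (g : List (Int × Int × Int)),
    g ∈ groupRuns L → g ≠ [] := by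
  intro L
  induction L with
  | nil => intro g hg; cases hg
  | cons e rest ih =>
    intro g hg
    cases hG : groupRuns rest with
    | nil =>
      simp only [groupRuns, hG] at hg
      simp at hg
      simp [hg]
    | cons g0 gs =>
      simp only [groupRuns, hG] at hg
      by_cases hc : ((g0.headD dE).2.1 = e.2.1)
      · rw [if_pos hc] at hg
        rcases List.mem_cons.mp hg with h | h
        · simp [h]
        · exact ih g (hG ▸ List.mem_cons_of_mem g0 h)
      · rw [if_neg hc] at hg
        rcases List.mem_cons.mp hg with h | h
        · simp [h]
        · exact ih g (hG ▸ h)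

theorem headD_mem {α : Type} (g : List α) (d : α) (h : g ≠ []) : g.headD d ∈ g := by
  cases g with
  | nil => exact absurd rfl h
  | cons x xs => simp

theorem groupRuns_col : ∀ (L : List (Int × Int × Int)) (g : List (Int × Int × Int)),
    g ∈ groupRuns L → ∀ e ∈ g, e.2.1 = (g.headD dE).2.1 := by
  intro L
  induction L with
  | nil => intro g hg; cases hg
  | cons e rest ih =>
    intro g hg f hf
    cases hG : groupRuns rest with
    | nil =>
      simp only [groupRuns, hG] at hg
      simp at hg
      subst hg
      simp at hf
      simp [hf]
    | cons g0 gs =>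
      simp only [groupRuns, hG] at hg
      by_cases hc : ((g0.headD dE).2.1 = e.2.1)
      · rw [if_pos hc] at hg
        rcases List.mem_cons.mp hg with h | h
        · subst h
          rcases List.mem_cons.mp hf with h' | h'
          · subst h'
            simp
          · have := ih g0 (hG ▸ List.mem_cons_self) f h'
            simp only [List.headD_cons]
            rw [this, hc]
        · exact ih g (hG ▸ List.mem_cons_of_mem g0 h) f hf
      · rw [if_neg hc] at hg
        rcases List.mem_cons.mp hg with h | h
        · subst h
          simp at hf
          simp [hf]
        · exact ih g (hG ▸ h) f hf

theorem groupRuns_mem_flatten : ∀ (L : List (Int × Int × Int)) (g : List (Int × Int × Int)),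
    g ∈ groupRuns L → ∀ e ∈ g, e ∈ L := by
  intro L g hg e he
  rw [← groupRuns_flatten L]
  exact List.mem_flatten.mpr ⟨g, hg, he⟩

theorem groupRuns_heads_lt : ∀ (L : List (Int × Int × Int)),
    L.Pairwise (fun p q => p.2.1 ≤ q.2.1) →
    (groupRuns L).Pairwise (fun g1 g2 => (g1.headD dE).2.1 < (g2.headD dE).2.1) := by
  intro L
  induction L with
  | nil => intro _; exact .nil
  | cons e rest ih =>
    intro hp
    obtain ⟨he, hrest⟩ := List.pairwise_cons.mp hp
    have IH := ih hrest
    cases hG : groupRuns rest with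
    | nil =>
      simp only [groupRuns, hG]
      exact List.pairwise_singleton _ _
    | cons g0 gs =>
      simp only [groupRuns, hG]
      rw [hG] at IH
      obtain ⟨hg0, hgs⟩ := List.pairwise_cons.mp IH
      have hg0ne : g0 ≠ [] := groupRuns_ne rest g0 (hG ▸ List.mem_cons_self)
      by_cases hc : ((g0.headD dE).2.1 = e.2.1)
      · rw [if_pos hc]
        refine List.pairwise_cons.mpr ⟨?_, hgs⟩
        intro g2 hg2
        simp only [List.headD_cons]
        rw [← hc]
        exact hg0 g2 hg2
      · rw [if_neg hc]
        refine List.pairwise_cons.mpr ⟨?_, IH⟩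
        intro g2 hg2
        simp only [List.headD_cons]
        have hmem0 : (g0.headD dE) ∈ rest :=
          groupRuns_mem_flatten rest g0 (hG ▸ List.mem_cons_self) _ (headD_mem _ _ hg0ne)
        have hlt0 : e.2.1 < (g0.headD dE).2.1 :=
          lt_of_le_of_ne (he _ hmem0) (fun h2 => hc h2.symm)
        rcases List.mem_cons.mp hg2 with h | h
        · rw [h]
          exact hlt0
        · have := hg0 g2 h
          omega

-- ======== the dedup pass as a structural function ========
def keptTail (prev : Int × Int × Int) : List (Int × Int × Int) → List (Int × Int × Int)
  | [] => []
  | y :: ys => if y.2.1 = prev.2.1 ∧ y.2.2 = prev.2.2 then keptTail y ys else y :: keptTail y ys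

def keptAll : List (Int × Int × Int) → List (Int × Int × Int)
  | [] => []
  | e :: rest => e :: keptTail e rest

theorem dedup_chain_eq (g : (Int × Int × Int) → (Int × Int × Int)) :
    ∀ (xs : List (Int × Int × Int)) (acc : List (Int × Int × Int)) (prev : Int × Int × Int),
    pairChain (fun res pr cur =>
        if cur.2.1 == pr.2.1 && cur.2.2 == pr.2.2 then res else res ++ [g cur]) acc prev xs
      = acc ++ (keptTail prev xs).map g := by
  intro xs
  induction xs with
  | nil => intro acc prev; simp [pairChain, keptTail]
  | cons y ys ih =>
    intro acc prev
    rw [pairChain, keptTail]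
    by_cases h : (y.2.1 = prev.2.1 ∧ y.2.2 = prev.2.2)
    · rw [if_pos h, show (y.2.1 == prev.2.1 && y.2.2 == prev.2.2) = true from by
        simp [h.1, h.2]]
      simp only [if_pos rfl]
      exact ih acc y
    · have hb : ¬ ((y.2.1 == prev.2.1 && y.2.2 == prev.2.2) = true) := by
        simpa using h
      rw [if_neg h, if_neg hb, ih (acc ++ [g y]) y]
      simp

theorem pairChain_append {α β : Type} (F : β → α → α → β) :
    ∀ (xs ys : List α) (acc : β) (prev : α),
    pairChain F acc prev (xs ++ ys)
      = pairChain F (pairChain F acc prev xs) (xs.getLastD prev) ys := by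
  intro xs
  induction xs with
  | nil => intro ys acc prev; rfl
  | cons x xs ih =>
    intro ys acc prev
    simp only [List.cons_append, pairChain]
    rw [ih, List.getLastD_cons]

theorem keptTail_append :
    ∀ (xs ys : List (Int × Int × Int)) (prev : Int × Int × Int),
    keptTail prev (xs ++ ys) = keptTail prev xs ++ keptTail (xs.getLastD prev) ys := by
  intro xs
  induction xs with
  | nil => intro ys prev; rfl
  | cons x xs ih =>
    intro ys prev
    simp only [List.cons_append, keptTail]
    by_cases h : (x.2.1 = prev.2.1 ∧ x.2.2 = prev.2.2)
    · rw [if_pos h, if_pos h, ih, List.getLastD_cons]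
    · rw [if_neg h, if_neg h, ih, List.getLastD_cons]
      simp

theorem keptTail_subset :
    ∀ (xs : List (Int × Int × Int)) (prev e : Int × Int × Int),
    e ∈ keptTail prev xs → e ∈ xs := by
  intro xs
  induction xs with
  | nil => intro prev e he; cases he
  | cons y ys ih =>
    intro prev e he
    rw [keptTail] at he
    by_cases h : (y.2.1 = prev.2.1 ∧ y.2.2 = prev.2.2)
    · rw [if_pos h] at he
      exact List.mem_cons_of_mem y (ih y e he)
    · rw [if_neg h] at he
      rcases List.mem_cons.mp he with h' | h'
      · simp [h']
      · exact List.mem_cons_of_mem y (ih y e h')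

theorem keptAll_subset (L : List (Int × Int × Int)) (e : Int × Int × Int)
    (he : e ∈ keptAll L) : e ∈ L := by
  cases L with
  | nil => cases he
  | cons f rest =>
    rw [keptAll] at he
    rcases List.mem_cons.mp he with h | h
    · simp [h]
    · exact List.mem_cons_of_mem f (keptTail_subset rest f e h)

theorem getLastD_mem {α : Type} : ∀ (xs : List α) (d : α), xs ≠ [] → xs.getLastD d ∈ xs
  | [x], d, _ => by simp [List.getLastD]
  | x :: y :: ys, d, _ => by
    rw [List.getLastD_cons]
    exact List.mem_cons_of_mem x (getLastD_mem (y :: ys) x (by simp))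

theorem keptTail_flatten :
    ∀ (G : List (List (Int × Int × Int))) (prev : Int × Int × Int),
    (∀ g ∈ G, g ≠ []) →
    (∀ g ∈ G, ∀ e ∈ g, e.2.1 = (g.headD dE).2.1) →
    G.Pairwise (fun g1 g2 => (g1.headD dE).2.1 < (g2.headD dE).2.1) →
    (∀ g ∈ G, prev.2.1 < (g.headD dE).2.1) →
    keptTail prev G.flatten = (G.map keptAll).flatten := by
  intro G
  induction G with
  | nil => intro prev _ _ _ _; rfl
  | cons g G' ih =>
    intro prev hne hcol hpair hprev
    obtain ⟨hg, hpair'⟩ := List.pairwise_cons.mp hpair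
    simp only [List.flatten_cons, List.map_cons]
    rw [keptTail_append]
    have hgne : g ≠ [] := hne g List.mem_cons_self
    obtain ⟨f, fs, rfl⟩ := List.exists_cons_of_ne_nil hgne
    have hhead : ¬ (f.2.1 = prev.2.1 ∧ f.2.2 = prev.2.2) := by
      intro hc
      have := hprev _ List.mem_cons_self
      simp only [List.headD_cons] at this
      omega
    congr 1
    · rw [keptTail, if_neg hhead, keptAll]
    · rw [List.getLastD_cons]
      apply ih
      · intro g2 hg2; exact hne g2 (List.mem_cons_of_mem _ hg2)
      · intro g2 hg2; exact hcol g2 (List.mem_cons_of_mem _ hg2)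
      · exact hpair'
      · intro g2 hg2
        have hlast : fs.getLastD f ∈ f :: fs := by
          cases fs with
          | nil => simp
          | cons a as => exact List.mem_cons_of_mem f (getLastD_mem (a :: as) f (by simp))
        have hlcol := hcol (f :: fs) List.mem_cons_self _ hlast
        rw [hlcol]
        exact hg g2 hg2

theorem keptAll_flatten (G : List (List (Int × Int × Int)))
    (hne : ∀ g ∈ G, g ≠ [])
    (hcol : ∀ g ∈ G, ∀ e ∈ g, e.2.1 = (g.headD dE).2.1)
    (hpair : G.Pairwise (fun g1 g2 => (g1.headD dE).2.1 < (g2.headD dE).2.1)) :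
    keptAll G.flatten = (G.map keptAll).flatten := by
  cases G with
  | nil => rfl
  | cons g G' =>
    obtain ⟨hg, hpair'⟩ := List.pairwise_cons.mp hpair
    have hgne : g ≠ [] := hne g List.mem_cons_self
    obtain ⟨f, fs, rfl⟩ := List.exists_cons_of_ne_nil hgne
    simp only [List.flatten_cons, List.map_cons, List.cons_append]
    rw [keptAll, keptTail_append, keptAll]
    have h1 : keptTail ((fs).getLastD f) G'.flatten = (G'.map keptAll).flatten := by
      apply keptTail_flatten G'
      · intro g2 hg2; exact hne g2 (List.mem_cons_of_mem _ hg2)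
      · intro g2 hg2; exact hcol g2 (List.mem_cons_of_mem _ hg2)
      · exact hpair'
      · intro g2 hg2
        have hlast : fs.getLastD f ∈ f :: fs := by
          cases fs with
          | nil => simp
          | cons a as => exact List.mem_cons_of_mem f (getLastD_mem (a :: as) f (by simp))
        have hlcol := hcol (f :: fs) List.mem_cons_self _ hlast
        rw [hlcol]
        exact hg g2 hg2
    rw [h1]
    simp

theorem keptTail_tags :
    ∀ (fs : List (Int × Int × Int)) (prev : Int × Int × Int),
    (∀ e ∈ fs, prev.2.2 ≤ e.2.2) → fs.Pairwise (fun p q => p.2.2 ≤ q.2.2) →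
    (∀ e ∈ fs, e.2.1 = prev.2.1) →
    ((keptTail prev fs).map (fun e => e.2.2)).Nodup ∧
    (∀ τ, τ ∈ (keptTail prev fs).map (fun e => e.2.2) ↔
      (τ ∈ fs.map (fun e => e.2.2) ∧ τ ≠ prev.2.2)) := by
  intro fs
  induction fs with
  | nil => intro prev _ _ _; simp [keptTail]
  | cons y ys ih =>
    intro prev hlb hpair hcol
    obtain ⟨hy, hpair'⟩ := List.pairwise_cons.mp hpair
    have hycol : y.2.1 = prev.2.1 := hcol y List.mem_cons_self
    by_cases h : y.2.2 = prev.2.2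
    · rw [keptTail, if_pos ⟨hycol, h⟩]
      obtain ⟨hnd, hmem⟩ := ih y hy hpair' (fun e he => by
        rw [hcol e (List.mem_cons_of_mem y he), hycol])
      refine ⟨hnd, fun τ => ?_⟩
      rw [hmem τ]
      simp only [List.map_cons, List.mem_cons]
      constructor
      · rintro ⟨h1, h2⟩
        exact ⟨Or.inr h1, fun hc => h2 (hc.trans h.symm)⟩
      · rintro ⟨h1 | h1, h2⟩
        · exact absurd (h1.trans h) h2
        · exact ⟨h1, fun hc => h2 (hc.trans h)⟩
    · rw [keptTail, if_neg (fun hc => h hc.2)]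
      have hlt : prev.2.2 < y.2.2 := lt_of_le_of_ne (hlb y List.mem_cons_self) (fun hc => h hc.symm)
      obtain ⟨hnd, hmem⟩ := ih y hy hpair' (fun e he => by
        rw [hcol e (List.mem_cons_of_mem y he), hycol])
      constructor
      · simp only [List.map_cons, List.nodup_cons]
        refine ⟨fun hc => ?_, hnd⟩
        exact ((hmem y.2.2).mp hc).2 rfl
      · intro τ
        simp only [List.map_cons, List.mem_cons]
        rw [hmem τ]
        constructor
        · rintro (h1 | ⟨h1, h2⟩)
          · exact ⟨Or.inl h1, by omega⟩
          · refine ⟨Or.inr h1, ?_⟩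
            obtain ⟨e, he, hetag⟩ := List.mem_map.mp h1
            have := hy e he
            omega
        · rintro ⟨h1 | h1, h2⟩
          · exact Or.inl h1
          · by_cases hyt : τ = y.2.2
            · exact Or.inl hyt
            · exact Or.inr ⟨h1, hyt⟩

-- ======== scan pass over a column-grouped list ========
def sumVals (g : List (Int × Int × Int)) : Int := (g.map (fun e => e.2.2)).sum

theorem scan_const (SF : (Int × Int) → (Int × Int × Int) → (Int × Int × Int) → (Int × Int))
    (hSF : ∀ p pr cur, SF p pr cur = if pr.2.1 == cur.2.1 then (p.1, p.2 + cur.2.2) else (max p.2 p.1, cur.2.2)) :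
    ∀ (gs : List (Int × Int × Int)) (ans cur : Int) (prev : Int × Int × Int),
    (∀ e ∈ gs, e.2.1 = prev.2.1) →
    pairChain SF (ans, cur) prev gs = (ans, cur + sumVals gs) := by
  intro gs
  induction gs with
  | nil => intro ans cur prev _; simp [pairChain, sumVals]
  | cons y ys ih =>
    intro ans cur prev hcol
    rw [pairChain, hSF, if_pos (by simp [hcol y List.mem_cons_self])]
    rw [ih _ _ y (fun e he => by rw [hcol e (List.mem_cons_of_mem y he), hcol y List.mem_cons_self])]
    simp [sumVals]
    ring

theorem scan_groups (SF : (Int × Int) → (Int × Int × Int) → (Int × Int × Int) → (Int × Int))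
    (hSF : ∀ p pr cur, SF p pr cur = if pr.2.1 == cur.2.1 then (p.1, p.2 + cur.2.2) else (max p.2 p.1, cur.2.2)) :
    ∀ (G : List (List (Int × Int × Int))) (ans cur : Int) (prev : Int × Int × Int),
    (∀ g ∈ G, g ≠ []) →
    (∀ g ∈ G, ∀ e ∈ g, e.2.1 = (g.headD dE).2.1) →
    G.Pairwise (fun g1 g2 => (g1.headD dE).2.1 < (g2.headD dE).2.1) →
    (∀ g ∈ G, prev.2.1 < (g.headD dE).2.1) →
    max (pairChain SF (ans, cur) prev G.flatten).2 (pairChain SF (ans, cur) prev G.flatten).1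
      = (G.map sumVals).foldl max (max cur ans) := by
  intro G
  induction G with
  | nil => intro ans cur prev _ _ _ _; rfl
  | cons g G' ih =>
    intro ans cur prev hne hcol hpair hprev
    obtain ⟨hg, hpair'⟩ := List.pairwise_cons.mp hpair
    have hgne : g ≠ [] := hne g List.mem_cons_self
    obtain ⟨f, fs, rfl⟩ := List.exists_cons_of_ne_nil hgne
    simp only [List.flatten_cons, List.cons_append, pairChain]
    rw [hSF, if_neg (by
      have := hprev _ List.mem_cons_self
      simp only [List.headD_cons] at this
      simp
      omega)]
    rw [pairChain_append, scan_const SF hSF fs (max cur ans) f.2.2 f (fun e he => by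
      have h1 := hcol _ List.mem_cons_self e (List.mem_cons_of_mem f he)
      have h2 := hcol _ List.mem_cons_self f List.mem_cons_self
      simp only [List.headD_cons] at h1 h2
      rw [h1])]
    have hlastcol : (fs.getLastD f).2.1 = ((f :: fs : List (Int × Int × Int)).headD dE).2.1 := by
      have hlast : fs.getLastD f ∈ (f :: fs : List (Int × Int × Int)) := by
        cases fs with
        | nil => simp
        | cons a as => exact List.mem_cons_of_mem f (getLastD_mem (a :: as) f (by simp))
      exact hcol _ List.mem_cons_self _ hlast
    rw [ih (max cur ans) (f.2.2 + sumVals fs) (fs.getLastD f)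
      (fun g2 hg2 => hne g2 (List.mem_cons_of_mem _ hg2))
      (fun g2 hg2 => hcol g2 (List.mem_cons_of_mem _ hg2))
      hpair'
      (fun g2 hg2 => by rw [hlastcol]; exact hg g2 hg2)]
    have hsum : sumVals (f :: fs) = f.2.2 + sumVals fs := by simp [sumVals]
    simp only [List.map_cons, List.foldl_cons, hsum]
    rw [max_comm cur ans]
    congr 1
    rw [max_comm]

-- ======== max over a list of non-negative ints ========
theorem maxD_id_eq_foldmax0 (xs : List Int) (hne : xs ≠ []) (hnn : ∀ x ∈ xs, 0 ≤ x) :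
    PySem.List.maxD xs (fun x => x) 0 = xs.foldl max 0 := by
  cases hmx : PySem.List.max? xs (fun x => x) with
  | none => exact absurd ((PySem.List.max?_eq_none_iff xs _).mp hmx) hne
  | some mx =>
    have h1 : ∀ y ∈ xs, y ≤ mx := PySem.List.max?_isMax hmx
    have h2 : mx ∈ xs := PySem.List.max?_mem hmx
    have h3 := PySem.List.le_foldl_max xs 0
    have h4 := PySem.List.foldl_max_mem xs 0
    have hD : PySem.List.maxD xs (fun x => x) 0 = mx := by simp [PySem.List.maxD, hmx]
    rw [hD]
    have h5 := h3.2 mx h2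
    rcases h4 with h | h
    · have := hnn mx h2
      omega
    · have := h1 _ h
      omega

theorem foldmax0_eq (xs ys : List Int)
    (hx : ∀ a ∈ xs, a ≤ ys.foldl max 0) (hy : ∀ b ∈ ys, b ≤ xs.foldl max 0) :
    xs.foldl max 0 = ys.foldl max 0 := by
  have h1 := PySem.List.foldl_max_mem xs 0
  have h2 := PySem.List.foldl_max_mem ys 0
  have h3 := (PySem.List.le_foldl_max xs 0).1
  have h4 := (PySem.List.le_foldl_max ys 0).1
  rcases h1 with h1 | h1 <;> rcases h2 with h2 | h2
  · omega
  · have := hy _ h2; omega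
  · have := hx _ h1; omega
  · have ha := hx _ h1
    have hb := hy _ h2
    omega

-- ======== loc entries ↔ blocks ========
theorem mem_locOfFrom :
    ∀ (blocks : List (List (Int × Int))) (k : Nat) (e : Int × Int × Int),
    e ∈ locOfFrom k blocks ↔
      ∃ j, ∃ h : j < blocks.length, (e.1, e.2.1) ∈ blocks[j] ∧ e.2.2 = ((k + j : Nat) : Int) := by
  intro blocks
  induction blocks with
  | nil => intro k e; simp [locOfFrom]
  | cons b bs ih =>
    intro k e
    rw [locOfFrom, List.mem_append]
    constructor
    · rintro (h | h)
      · obtain ⟨p, hp, hpe⟩ := List.mem_map.mp h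
        refine ⟨0, by simp, ?_, ?_⟩
        · subst hpe; simpa using hp
        · subst hpe; simp
      · obtain ⟨j, hj, hcell, htag⟩ := (ih (k + 1) e).mp h
        refine ⟨j + 1, by simpa using hj, by simpa using hcell, ?_⟩
        rw [htag]
        have h9 : k + 1 + j = k + (j + 1) := by omega
        rw [h9]
    · rintro ⟨j, hj, hcell, htag⟩
      cases j with
      | zero =>
        left
        simp only [List.getElem_cons_zero] at hcell
        apply List.mem_map.mpr
        refine ⟨(e.1, e.2.1), hcell, ?_⟩
        have h9 : e.2.2 = (k : Int) := by rw [htag]; norm_num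
        rw [← h9]
      | succ j' =>
        right
        apply (ih (k + 1) e).mpr
        refine ⟨j', by simpa using hj, by simpa using hcell, ?_⟩
        rw [htag]
        have h9 : k + (j' + 1) = k + 1 + j' := by omega
        rw [h9]

theorem locOfFrom_cells :
    ∀ (blocks : List (List (Int × Int))) (k : Nat),
    (locOfFrom k blocks).map (fun e => (e.1, e.2.1)) = blocks.flatten := by
  intro blocks
  induction blocks with
  | nil => intro k; rfl
  | cons b bs ih =>
    intro k
    have hcomp : (List.map (fun p => (p.1, p.2, (k : Int))) b).map (fun e => (e.1, e.2.1)) = b := by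
      induction b with
      | nil => rfl
      | cons p ps ihp => simp [ihp]
    simp only [locOfFrom, List.map_append, ih (k + 1), tagged, List.flatten_cons, hcomp]

theorem locOfFrom_ne_nil (blocks : List (List (Int × Int)))
    (hbl : blocks ≠ []) (hbne : ∀ b ∈ blocks, b ≠ []) : locOfFrom 1 blocks ≠ [] := by
  obtain ⟨b, bs, rfl⟩ := List.exists_cons_of_ne_nil hbl
  obtain ⟨p, ps, rfl⟩ := List.exists_cons_of_ne_nil (hbne _ List.mem_cons_self)
  simp [locOfFrom, tagged]

theorem sizesOfFrom_getD :
    ∀ (blocks : List (List (Int × Int))) (k j : Nat) (h : j < blocks.length),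
    (sizesOfFrom k blocks).getD j (0, 0) = (((k + j : Nat) : Int), (blocks[j].length : Int)) := by
  intro blocks
  induction blocks with
  | nil => intro k j h; simp at h
  | cons b bs ih =>
    intro k j h
    cases j with
    | zero => simp [sizesOfFrom]
    | succ j' =>
      rw [sizesOfFrom]
      simp only [List.getD_cons_succ]
      rw [ih (k + 1) j' (by simpa using h)]
      have : k + 1 + j' = k + (j' + 1) := by omega
      rw [this]
      simp

def szB (blocks : List (List (Int × Int))) (τ : Int) : Int :=
  (PySem.List.pyGetD (sizesOfFrom 1 blocks) (τ - 1) (0, 0)).2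

theorem szB_tag (blocks : List (List (Int × Int))) (j : Nat) (hj : j < blocks.length) :
    szB blocks (((1 + j : Nat) : Int)) = (blocks[j].length : Int) := by
  unfold szB
  have h0 : ((1 + j : Nat) : Int) - 1 = ((j : Nat) : Int) := by push_cast; ring
  rw [h0, PySem.List.pyGetD_natCast, sizesOfFrom_getD blocks 1 j hj]

-- ======== colSpec bridging ========
theorem colSpec_nonneg (blocks : List (List (Int × Int))) (c : Int) : 0 ≤ colSpec blocks c := by
  apply List.sum_nonneg
  intro x hx
  obtain ⟨b, _, rfl⟩ := List.mem_map.mp hx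
  split <;> positivity

theorem colSpec_eq_zero (blocks : List (List (Int × Int))) (c : Int)
    (h : ∀ b ∈ blocks, c ∉ colsOf b) : colSpec blocks c = 0 := by
  apply List.sum_eq_zero
  intro x hx
  obtain ⟨b, hb, rfl⟩ := List.mem_map.mp hx
  rw [if_neg (h b hb)]

theorem colSpec_eq_js (c : Int) :
    ∀ (blocks : List (List (Int × Int))),
    colSpec blocks c
      = (((List.range blocks.length).filter
            (fun j => decide (c ∈ colsOf (blocks.getD j [])))).map
          (fun j => ((blocks.getD j []).length : Int))).sum := by
  intro blocks
  induction blocks using List.reverseRecOn with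
  | nil => simp [colSpec]
  | append_singleton bs b ih =>
    rw [colSpec_append, ih]
    have hlen : (bs ++ [b]).length = bs.length + 1 := by simp
    rw [hlen, List.range_succ, List.filter_append, List.map_append, List.sum_append]
    have hpref : ∀ j ∈ List.range bs.length, (bs ++ [b]).getD j [] = bs.getD j [] := by
      intro j hj
      rw [List.mem_range] at hj
      rw [List.getD_eq_getElem?_getD, List.getElem?_append_left hj, ← List.getD_eq_getElem?_getD]
    have h1 : (List.range bs.length).filter (fun j => decide (c ∈ colsOf ((bs ++ [b]).getD j [])))
        = (List.range bs.length).filter (fun j => decide (c ∈ colsOf (bs.getD j []))) := by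
      apply List.filter_congr
      intro j hj
      rw [hpref j hj]
    have h2 : ((List.range bs.length).filter (fun j => decide (c ∈ colsOf (bs.getD j [])))).map
          (fun j => (((bs ++ [b]).getD j []).length : Int))
        = ((List.range bs.length).filter (fun j => decide (c ∈ colsOf (bs.getD j [])))).map
          (fun j => ((bs.getD j []).length : Int)) := by
      apply List.map_congr_left
      intro j hj
      rw [hpref j (List.mem_of_mem_filter hj)]
    rw [h1, h2]
    have hlast : (bs ++ [b]).getD bs.length [] = b := by
      rw [List.getD_eq_getElem?_getD, List.getElem?_append_right (le_refl _)]
      simp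
    by_cases hb : c ∈ colsOf b
    · rw [if_pos hb]
      have : List.filter (fun j => decide (c ∈ colsOf ((bs ++ [b]).getD j []))) [bs.length]
          = [bs.length] := by
        simp [List.filter, hlast, hb]
      rw [this]
      simp [hlast]
    · rw [if_neg hb]
      have : List.filter (fun j => decide (c ∈ colsOf ((bs ++ [b]).getD j []))) [bs.length]
          = [] := by
        simp [List.filter, hlast, hb]
      rw [this]
      simp

theorem colSpec_eq_sum_tags (blocks : List (List (Int × Int))) (c : Int) (ts : List Int)
    (hnd : ts.Nodup)
    (hmem : ∀ τ, τ ∈ ts ↔ ∃ j, ∃ h : j < blocks.length, τ = ((1 + j : Nat) : Int) ∧ c ∈ colsOf blocks[j]) :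
    (ts.map (szB blocks)).sum = colSpec blocks c := by
  set js := (List.range blocks.length).filter (fun j => decide (c ∈ colsOf (blocks.getD j []))) with hjs
  have hjmem : ∀ j, j ∈ js ↔ j < blocks.length ∧ c ∈ colsOf (blocks.getD j []) := by
    intro j
    rw [hjs, List.mem_filter, List.mem_range]
    simp
  have hperm : ts.Perm (js.map (fun j => ((1 + j : Nat) : Int))) := by
    apply List.perm_of_nodup_nodup_toFinset_eq hnd
    · apply List.Nodup.map
      · intro a b hab
        have h9 : ((1 + a : Nat) : Int) = ((1 + b : Nat) : Int) := hab
        omega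
      · exact List.Nodup.filter _ (List.nodup_range)
    · apply Finset.ext
      intro τ
      simp only [List.mem_toFinset, List.mem_map]
      rw [hmem τ]
      constructor
      · rintro ⟨j, hj, rfl, htouch⟩
        refine ⟨j, (hjmem j).mpr ⟨hj, ?_⟩, rfl⟩
        rw [List.getD_eq_getElem?_getD, List.getElem?_eq_getElem hj, Option.getD_some]
        exact htouch
      · rintro ⟨j, hjin, rfl⟩
        obtain ⟨hj, htouch⟩ := (hjmem j).mp hjin
        refine ⟨j, hj, rfl, ?_⟩
        rw [List.getD_eq_getElem?_getD, List.getElem?_eq_getElem hj, Option.getD_some] at htouch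
        exact htouch
  rw [(hperm.map (szB blocks)).sum_eq, List.map_map]
  have hmapeq : js.map (szB blocks ∘ fun j => ((1 + j : Nat) : Int))
      = js.map (fun j => ((blocks.getD j []).length : Int)) := by
    apply List.map_congr_left
    intro j hjin
    obtain ⟨hj, _⟩ := (hjmem j).mp hjin
    simp only [Function.comp]
    rw [szB_tag blocks j hj, List.getD_eq_getElem?_getD, List.getElem?_eq_getElem hj,
      Option.getD_some]
  rw [hmapeq, colSpec_eq_js]

theorem pairwise_mem_unique {α : Type} (R : α → α → Prop) :
    ∀ (L : List α), L.Pairwise R → ∀ a ∈ L, ∀ b ∈ L, ¬ R a b → ¬ R b a → a = b := by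
  intro L
  induction L with
  | nil => intro _ a ha; cases ha
  | cons x xs ih =>
    intro hp a ha b hb hab hba
    obtain ⟨hx, hxs⟩ := List.pairwise_cons.mp hp
    rcases List.mem_cons.mp ha with ha' | ha' <;> rcases List.mem_cons.mp hb with hb' | hb'
    · rw [ha', hb']
    · subst ha'
      exact absurd (hx b hb') hab
    · subst hb'
      exact absurd (hx a ha') hba
    · exact ih hxs a ha' b hb' hab hba

theorem keptAll_ne_nil (g : List (Int × Int × Int)) (hg : g ≠ []) : keptAll g ≠ [] := by
  obtain ⟨f, fs, rfl⟩ := List.exists_cons_of_ne_nil hg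
  simp [keptAll]

def scanStep (p : Int × Int) (pr cur : Int × Int × Int) : Int × Int :=
  if pr.2.1 == cur.2.1 then (p.1, p.2 + cur.2.2) else (max p.2 p.1, cur.2.2)

theorem scanStep_eq : ∀ (p : Int × Int) (pr cur : Int × Int × Int),
    scanStep p pr cur
      = if pr.2.1 == cur.2.1 then (p.1, p.2 + cur.2.2) else (max p.2 p.1, cur.2.2) :=
  fun _ _ _ => rfl

-- ======== one group's scanned sum is a column total ========
theorem sumK_eq (blocks : List (List (Int × Int)))
    (w : (Int × Int × Int) → Int)
    (hw : ∀ e ∈ locOfFrom 1 blocks, w e = szB blocks e.2.2)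
    (L : List (Int × Int × Int))
    (hmemL : ∀ e, e ∈ L ↔ e ∈ locOfFrom 1 blocks)
    (hlex : L.Pairwise LexCT)
    (g : List (Int × Int × Int)) (hg : g ∈ groupRuns L) :
    sumVals ((keptAll g).map (fun e => (e.1, e.2.1, w e)))
      = colSpec blocks ((g.headD dE).2.1) := by
  have hgne : g ≠ [] := groupRuns_ne L g hg
  obtain ⟨f, fs, rfl⟩ := List.exists_cons_of_ne_nil hgne
  have hsub : (f :: fs).Sublist L := by
    have h := List.sublist_flatten_of_mem hg
    rwa [groupRuns_flatten L] at h
  have hgpair : (f :: fs).Pairwise LexCT := hlex.sublist hsub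
  have hcolg : ∀ e ∈ (f :: fs), e.2.1 = ((f :: fs : List (Int × Int × Int)).headD dE).2.1 :=
    fun e he => groupRuns_col L _ hg e he
  have hfc : f.2.1 = ((f :: fs : List (Int × Int × Int)).headD dE).2.1 := by simp
  have htagle : (f :: fs).Pairwise (fun p q => p.2.2 ≤ q.2.2) := by
    refine List.Pairwise.imp_of_mem ?_ hgpair
    intro a b ha hb hab
    have h1 := hcolg a ha
    have h2 := hcolg b hb
    rcases hab with h | h
    · omega
    · exact h.2
  obtain ⟨hf, hfs⟩ := List.pairwise_cons.mp htagle
  obtain ⟨hndT, hmemT⟩ := keptTail_tags fs f hf hfs (fun e he => by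
    rw [hcolg e (List.mem_cons_of_mem f he), ← hfc])
  have hTmem : ∀ τ, τ ∈ (keptAll (f :: fs)).map (fun e => e.2.2) ↔
      τ ∈ (f :: fs).map (fun e => e.2.2) := by
    intro τ
    rw [keptAll]
    simp only [List.map_cons, List.mem_cons]
    rw [hmemT τ]
    constructor
    · rintro (h | ⟨h1, _⟩)
      · exact Or.inl h
      · exact Or.inr h1
    · rintro (h | h)
      · exact Or.inl h
      · by_cases hft : τ = f.2.2
        · exact Or.inl hft
        · exact Or.inr ⟨h, hft⟩
  have hTnodup : ((keptAll (f :: fs)).map (fun e => e.2.2)).Nodup := by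
    rw [keptAll]
    simp only [List.map_cons, List.nodup_cons]
    exact ⟨fun hc' => ((hmemT _).mp hc').2 rfl, hndT⟩
  have hgtags : ∀ τ, τ ∈ (f :: fs).map (fun e => e.2.2) ↔
      ∃ j, ∃ h : j < blocks.length, τ = ((1 + j : Nat) : Int) ∧
        ((f :: fs : List (Int × Int × Int)).headD dE).2.1 ∈ colsOf blocks[j] := by
    intro τ
    constructor
    · intro h
      obtain ⟨e, he, rfl⟩ := List.mem_map.mp h
      have heL : e ∈ locOfFrom 1 blocks := (hmemL e).mp (hsub.subset he)
      obtain ⟨j, hj, hcell, htag⟩ := (mem_locOfFrom blocks 1 e).mp heL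
      refine ⟨j, hj, htag, ?_⟩
      rw [← hcolg e he]
      exact List.mem_map.mpr ⟨(e.1, e.2.1), hcell, rfl⟩
    · rintro ⟨j, hj, rfl, htouch⟩
      obtain ⟨p, hp, hpc⟩ := List.mem_map.mp htouch
      have heL : (p.1, p.2, ((1 + j : Nat) : Int)) ∈ locOfFrom 1 blocks := by
        apply (mem_locOfFrom blocks 1 _).mpr
        exact ⟨j, hj, by simpa using hp, rfl⟩
      have heL2 : (p.1, p.2, ((1 + j : Nat) : Int)) ∈ L := (hmemL _).mpr heL
      rw [← groupRuns_flatten L] at heL2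
      obtain ⟨g2, hg2, heg2⟩ := List.mem_flatten.mp heL2
      have hcols : (g2.headD dE).2.1 = ((f :: fs : List (Int × Int × Int)).headD dE).2.1 := by
        have h2 := groupRuns_col L g2 hg2 _ heg2
        simp only at h2
        rw [← h2]
        simpa using hpc
      have hpairG := groupRuns_heads_lt L (hlex.imp (fun hab => by
        rcases hab with h | h
        · exact le_of_lt h
        · exact le_of_eq h.1))
      have hgeq : g2 = (f :: fs) :=
        pairwise_mem_unique _ _ hpairG g2 hg2 (f :: fs) hg (by omega) (by omega)
      rw [hgeq] at heg2
      exact List.mem_map.mpr ⟨_, heg2, rfl⟩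
  have hsum1 : sumVals ((keptAll (f :: fs)).map (fun e => (e.1, e.2.1, w e)))
      = ((keptAll (f :: fs)).map (fun e => w e)).sum := by
    simp only [sumVals, List.map_map]
    apply congrArg List.sum
    apply List.map_congr_left
    intro e _
    rfl
  rw [hsum1]
  have hsum2 : (keptAll (f :: fs)).map (fun e => w e)
      = (keptAll (f :: fs)).map (fun e => szB blocks e.2.2) := by
    apply List.map_congr_left
    intro e he
    exact hw e ((hmemL e).mp (hsub.subset (keptAll_subset _ e he)))
  rw [hsum2]
  have hsum3 : (keptAll (f :: fs)).map (fun e => szB blocks e.2.2)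
      = ((keptAll (f :: fs)).map (fun e => e.2.2)).map (szB blocks) := by
    rw [List.map_map]
    rfl
  rw [hsum3]
  exact colSpec_eq_sum_tags blocks _ _ hTnodup (fun τ => by rw [hTmem τ, hgtags τ])

-- ======== the whole of A's tail equals the column-total maximum ========
theorem tailA_eq (N M : Nat) (blocks : List (List (Int × Int))) (vis1 : List (List Int))
    (hsh : gshape N M vis1)
    (hnd : blocks.flatten.Nodup)
    (hwin : ∀ p ∈ blocks.flatten, inW N M p.1 p.2)
    (hbne : ∀ b ∈ blocks, b ≠ [])
    (hblocks : blocks ≠ [])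
    (visited2 : List (List Int))
    (hvis2 : visited2 = (locOfFrom 1 blocks).foldl
      (fun v e => gridSet v e.1 e.2.1
        (PySem.List.pyGetD (sizesOfFrom 1 blocks) (e.2.2 - 1) (0, 0)).2) vis1)
    (loc2 : List (Int × Int × Int))
    (hloc2 : loc2 = PySem.List.sorted (locOfFrom 1 blocks) (fun e => e.2.1) false)
    (result : List (Int × Int × Int))
    (hresult : result = (PySem.List.pyRange 1 (PySem.List.len loc2) 1).foldl (fun res i =>
        if (PySem.List.pyGetD loc2 i (0, 0, 0)).2.1 == (PySem.List.pyGetD loc2 (i - 1) (0, 0, 0)).2.1 &&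
           (PySem.List.pyGetD loc2 i (0, 0, 0)).2.2 == (PySem.List.pyGetD loc2 (i - 1) (0, 0, 0)).2.2 then res
        else res ++ [((PySem.List.pyGetD loc2 i (0, 0, 0)).1, (PySem.List.pyGetD loc2 i (0, 0, 0)).2.1,
          gridGet visited2 (PySem.List.pyGetD loc2 i (0, 0, 0)).1 (PySem.List.pyGetD loc2 i (0, 0, 0)).2.1)])
      [((PySem.List.pyGetD loc2 0 (0, 0, 0)).1, (PySem.List.pyGetD loc2 0 (0, 0, 0)).2.1,
        gridGet visited2 (PySem.List.pyGetD loc2 0 (0, 0, 0)).1 (PySem.List.pyGetD loc2 0 (0, 0, 0)).2.1)])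
    (fin : Int × Int)
    (hfin : fin = (PySem.List.pyRange 1 (PySem.List.len result) 1).foldl
      (fun (p : Int × Int) i =>
        if (PySem.List.pyGetD result (i - 1) (0, 0, 0)).2.1 == (PySem.List.pyGetD result i (0, 0, 0)).2.1
        then (p.1, p.2 + (PySem.List.pyGetD result i (0, 0, 0)).2.2)
        else (max p.2 p.1, (PySem.List.pyGetD result i (0, 0, 0)).2.2))
      (0, (PySem.List.pyGetD result 0 (0, 0, 0)).2.2)) :
    max fin.2 fin.1 = ((List.range M).map (fun c : Nat => colSpec blocks ((c : Int)))).foldl max 0 := by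
  have h_tags : (locOfFrom 1 blocks).Pairwise (fun p q => p.2.2 ≤ q.2.2) := locOfFrom_tag_mono blocks 1
  have hlex : loc2.Pairwise LexCT := by rw [hloc2]; exact sorted_lex _ h_tags
  have hmemL : ∀ e, e ∈ loc2 ↔ e ∈ locOfFrom 1 blocks := by
    intro e
    rw [hloc2]
    exact PySem.List.mem_sorted _ _ _ e
  have hLne : loc2 ≠ [] := by
    rw [hloc2, Ne, PySem.List.sorted_eq_nil_iff]
    exact locOfFrom_ne_nil blocks hblocks hbne
  have hlocwin : ∀ e ∈ locOfFrom 1 blocks, inW N M e.1 e.2.1 := by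
    intro e he
    have hc : (e.1, e.2.1) ∈ blocks.flatten := by
      rw [← locOfFrom_cells blocks 1]
      exact List.mem_map.mpr ⟨e, he, rfl⟩
    exact hwin _ hc
  have hval : ∀ e ∈ locOfFrom 1 blocks, gridGet visited2 e.1 e.2.1 = szB blocks e.2.2 := by
    intro e he
    rw [hvis2]
    exact write_fold_value (N := N) (M := M) _ (locOfFrom 1 blocks) vis1 hsh hlocwin
      (by rw [locOfFrom_cells blocks 1]; exact hnd) e he
  obtain ⟨x, tl, hL⟩ := List.exists_cons_of_ne_nil hLne
  have he0 : PySem.List.pyGetD loc2 0 (0, 0, 0) = x := by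
    rw [hL]
    exact PySem.List.pyGetD_zero_cons _ _ _
  have hres2 : result = (keptAll loc2).map (fun e => (e.1, e.2.1, gridGet visited2 e.1 e.2.1)) := by
    rw [hresult, he0, hL,
      chain_eq_fold (fun res pr cur =>
        if cur.2.1 == pr.2.1 && cur.2.2 == pr.2.2 then res
        else res ++ [(cur.1, cur.2.1, gridGet visited2 cur.1 cur.2.1)]) (0, 0, 0) x tl _,
      dedup_chain_eq (fun e => (e.1, e.2.1, gridGet visited2 e.1 e.2.1)) tl _ x,
      keptAll, List.map_cons]
    rfl
  -- the column groups of loc2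
  have hGflat : (groupRuns loc2).flatten = loc2 := groupRuns_flatten loc2
  have hGne : ∀ g ∈ groupRuns loc2, g ≠ [] := groupRuns_ne loc2
  have hGcol : ∀ g ∈ groupRuns loc2, ∀ e ∈ g, e.2.1 = (g.headD dE).2.1 := groupRuns_col loc2
  have hGheads := groupRuns_heads_lt loc2 (hlex.imp (fun hab => by
    rcases hab with h | h
    · exact le_of_lt h
    · exact le_of_eq h.1))
  have hK : keptAll loc2 = ((groupRuns loc2).map keptAll).flatten := by
    have h := keptAll_flatten (groupRuns loc2) hGne hGcol hGheads
    rw [hGflat] at h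
    exact h
  have hGnil : groupRuns loc2 ≠ [] := by
    intro h
    have hemp : loc2 = [] := by rw [← hGflat, h]; rfl
    exact hLne hemp
  obtain ⟨g1, G', hGsplit⟩ := List.exists_cons_of_ne_nil hGnil
  have hg1mem : g1 ∈ groupRuns loc2 := by rw [hGsplit]; exact List.mem_cons_self
  have hg1ne : g1 ≠ [] := hGne g1 hg1mem
  obtain ⟨f1, fs1, hg1⟩ := List.exists_cons_of_ne_nil hg1ne
  have hflat2 : f1 :: (fs1 ++ G'.flatten) = x :: tl := by
    have h := hGflat
    rw [hGsplit, hg1, hL] at h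
    simpa using h
  have hf1x : f1 = x := by
    have := congrArg (fun l => l.headD dE) hflat2
    simpa using this
  have htl : tl = fs1 ++ G'.flatten := by
    have := congrArg List.tail hflat2
    simpa using this.symm
  have hkAll : keptAll loc2 = x :: keptTail x tl := by rw [hL, keptAll]
  have hKsplit : keptTail x tl = keptTail x fs1 ++ (G'.map keptAll).flatten := by
    have h := hK
    rw [hkAll, hGsplit, List.map_cons, List.flatten_cons, hg1, hf1x, keptAll] at h
    simpa using h
  -- column facts about the first group
  have hg1col : ∀ e ∈ g1, e.2.1 = x.2.1 := by
    intro e he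
    have h := hGcol g1 hg1mem e he
    rw [hg1] at h
    simpa [hf1x] using h
  -- the scan as a pair chain
  have hresult2 : result
      = (x.1, x.2.1, gridGet visited2 x.1 x.2.1) ::
        (keptTail x tl).map (fun e => (e.1, e.2.1, gridGet visited2 e.1 e.2.1)) := by
    rw [hres2, hkAll, List.map_cons]
  have hr0 : PySem.List.pyGetD result 0 (0, 0, 0) = (x.1, x.2.1, gridGet visited2 x.1 x.2.1) := by
    rw [hresult2]
    exact PySem.List.pyGetD_zero_cons _ _ _
  have hchain := chain_eq_fold (α := Int × Int × Int) (β := Int × Int) scanStep (0, 0, 0)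
    (x.1, x.2.1, gridGet visited2 x.1 x.2.1)
    ((keptTail x tl).map (fun e => (e.1, e.2.1, gridGet visited2 e.1 e.2.1)))
    (0, gridGet visited2 x.1 x.2.1)
  have hfin2 : fin = pairChain scanStep
      (0, gridGet visited2 x.1 x.2.1) (x.1, x.2.1, gridGet visited2 x.1 x.2.1)
      ((keptTail x tl).map (fun e => (e.1, e.2.1, gridGet visited2 e.1 e.2.1))) := by
    rw [hfin, hr0, hresult2]
    exact hchain
  -- split the chain along the groups
  have hrtl2 : (keptTail x tl).map (fun e => (e.1, e.2.1, gridGet visited2 e.1 e.2.1))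
      = (keptTail x fs1).map (fun e => (e.1, e.2.1, gridGet visited2 e.1 e.2.1)) ++
        ((G'.map keptAll).map
          (List.map (fun e => (e.1, e.2.1, gridGet visited2 e.1 e.2.1)))).flatten := by
    rw [hKsplit, List.map_append, List.map_flatten]
  have hkt1col : ∀ e' ∈ (keptTail x fs1).map (fun e => (e.1, e.2.1, gridGet visited2 e.1 e.2.1)),
      e'.2.1 = x.2.1 := by
    intro e' he'
    obtain ⟨e, he, rfl⟩ := List.mem_map.mp he'
    have heg : e ∈ g1 := by
      rw [hg1, hf1x]
      exact List.mem_cons_of_mem x (keptTail_subset fs1 x e he)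
    simpa using hg1col e heg
  -- mapped kept groups
  have hmgne : ∀ gm ∈ (G'.map keptAll).map
      (List.map (fun e => (e.1, e.2.1, gridGet visited2 e.1 e.2.1))), gm ≠ [] := by
    intro gm hgm
    obtain ⟨gk, hgk, rfl⟩ := List.mem_map.mp hgm
    obtain ⟨g', hg', rfl⟩ := List.mem_map.mp hgk
    have : keptAll g' ≠ [] := keptAll_ne_nil g' (hGne g' (by rw [hGsplit]; exact List.mem_cons_of_mem _ hg'))
    simpa using this
  have hheadmap : ∀ g' ∈ G', (((keptAll g').map
        (fun e => (e.1, e.2.1, gridGet visited2 e.1 e.2.1))).headD dE).2.1 = (g'.headD dE).2.1 := by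
    intro g' hg'
    have hne' : g' ≠ [] := hGne g' (by rw [hGsplit]; exact List.mem_cons_of_mem _ hg')
    obtain ⟨f', fs', rfl⟩ := List.exists_cons_of_ne_nil hne'
    rfl
  have hmgcol : ∀ gm ∈ (G'.map keptAll).map
      (List.map (fun e => (e.1, e.2.1, gridGet visited2 e.1 e.2.1))),
      ∀ e ∈ gm, e.2.1 = (gm.headD dE).2.1 := by
    intro gm hgm e he
    obtain ⟨gk, hgk, rfl⟩ := List.mem_map.mp hgm
    obtain ⟨g', hg', rfl⟩ := List.mem_map.mp hgk
    obtain ⟨e', he', rfl⟩ := List.mem_map.mp he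
    have hg'mem : g' ∈ groupRuns loc2 := by rw [hGsplit]; exact List.mem_cons_of_mem _ hg'
    have h1 : e'.2.1 = (g'.headD dE).2.1 := hGcol g' hg'mem e' (keptAll_subset g' e' he')
    rw [hheadmap g' hg']
    simpa using h1
  have hG'pair : G'.Pairwise (fun a b => (a.headD dE).2.1 < (b.headD dE).2.1) := by
    have h := hGheads
    rw [hGsplit] at h
    exact (List.pairwise_cons.mp h).2
  have hg1lt : ∀ g' ∈ G', (g1.headD dE).2.1 < (g'.headD dE).2.1 := by
    have h := hGheads
    rw [hGsplit] at h
    exact (List.pairwise_cons.mp h).1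
  have hmgpair : ((G'.map keptAll).map
      (List.map (fun e => (e.1, e.2.1, gridGet visited2 e.1 e.2.1)))).Pairwise
      (fun a b => (a.headD dE).2.1 < (b.headD dE).2.1) := by
    rw [List.pairwise_map, List.pairwise_map]
    refine List.Pairwise.imp_of_mem ?_ hG'pair
    intro a b ha hb hab
    rw [hheadmap a ha, hheadmap b hb]
    exact hab
  -- run the chain
  have hlastmem : ((keptTail x fs1).map (fun e => (e.1, e.2.1, gridGet visited2 e.1 e.2.1))).getLastD
      (x.1, x.2.1, gridGet visited2 x.1 x.2.1)
      ∈ ((x.1, x.2.1, gridGet visited2 x.1 x.2.1) ::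
        (keptTail x fs1).map (fun e => (e.1, e.2.1, gridGet visited2 e.1 e.2.1))) := by
    cases hkt : (keptTail x fs1).map (fun e => (e.1, e.2.1, gridGet visited2 e.1 e.2.1)) with
    | nil => simp
    | cons a as =>
      rw [List.getLastD_cons]
      have hmm2 := getLastD_mem (a :: as) a (by simp)
      rw [List.getLastD_cons] at hmm2
      exact List.mem_cons_of_mem _ hmm2
  have hlastcol : (((keptTail x fs1).map (fun e => (e.1, e.2.1, gridGet visited2 e.1 e.2.1))).getLastD
      (x.1, x.2.1, gridGet visited2 x.1 x.2.1)).2.1 = x.2.1 := by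
    rcases List.mem_cons.mp hlastmem with h | h
    · rw [h]
    · exact hkt1col _ h
  have hfinval : max fin.2 fin.1
      = (((G'.map keptAll).map
          (List.map (fun e => (e.1, e.2.1, gridGet visited2 e.1 e.2.1)))).map sumVals).foldl max
        (max (gridGet visited2 x.1 x.2.1 +
          sumVals ((keptTail x fs1).map (fun e => (e.1, e.2.1, gridGet visited2 e.1 e.2.1)))) 0) := by
    rw [hfin2, hrtl2, pairChain_append,
      scan_const scanStep scanStep_eq _ 0 (gridGet visited2 x.1 x.2.1) _ (fun e he => by
        rw [hkt1col e he])]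
    exact scan_groups scanStep scanStep_eq _ 0 _ _ hmgne hmgcol hmgpair (fun gm hgm => by
      obtain ⟨gk, hgk, rfl⟩ := List.mem_map.mp hgm
      obtain ⟨g', hg', rfl⟩ := List.mem_map.mp hgk
      rw [hheadmap g' hg', hlastcol]
      have hx1 : x.2.1 = (g1.headD dE).2.1 := by rw [hg1, hf1x]; rfl
      rw [hx1]
      exact hg1lt g' hg')
  -- identify the group sums with column totals
  have hsumK : ∀ g ∈ groupRuns loc2,
      sumVals ((keptAll g).map (fun e => (e.1, e.2.1, gridGet visited2 e.1 e.2.1)))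
        = colSpec blocks ((g.headD dE).2.1) :=
    fun g hg => sumK_eq blocks _ hval loc2 hmemL hlex g hg
  have hs1 : gridGet visited2 x.1 x.2.1 +
      sumVals ((keptTail x fs1).map (fun e => (e.1, e.2.1, gridGet visited2 e.1 e.2.1)))
      = colSpec blocks ((g1.headD dE).2.1) := by
    rw [← hsumK g1 hg1mem, hg1, hf1x, keptAll, List.map_cons]
    simp [sumVals]
  have hAans : max fin.2 fin.1
      = ((groupRuns loc2).map (fun g => colSpec blocks ((g.headD dE).2.1))).foldl max 0 := by
    rw [hfinval, hs1, hGsplit, List.map_cons, List.foldl_cons, max_comm 0]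
    congr 1
    rw [List.map_map, List.map_map]
    apply List.map_congr_left
    intro g' hg'
    simp only [Function.comp]
    rw [hsumK g' (by rw [hGsplit]; exact List.mem_cons_of_mem _ hg')]
  rw [hAans]
  -- compare the two max lists
  apply foldmax0_eq
  · intro a ha
    obtain ⟨g, hg, rfl⟩ := List.mem_map.mp ha
    have hgne' : g ≠ [] := hGne g hg
    have hhead : g.headD dE ∈ g := headD_mem g dE hgne'
    have hheadloc : g.headD dE ∈ locOfFrom 1 blocks :=
      (hmemL _).mp (groupRuns_mem_flatten loc2 g hg _ hhead)
    have hbounds := hlocwin _ hheadloc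
    refine (PySem.List.le_foldl_max _ 0).2 _ ?_
    apply List.mem_map.mpr
    refine ⟨(g.headD dE).2.1.toNat, List.mem_range.mpr (by
      obtain ⟨_, _, h3, h4⟩ := hbounds
      omega), ?_⟩
    congr 1
    obtain ⟨_, _, h3, h4⟩ := hbounds
    omega
  · intro b hb
    obtain ⟨c, hc, rfl⟩ := List.mem_map.mp hb
    rw [List.mem_range] at hc
    by_cases hocc : ∃ e ∈ loc2, e.2.1 = ((c : Nat) : Int)
    · obtain ⟨e, he, hec⟩ := hocc
      rw [← hGflat] at he
      obtain ⟨g2, hg2, heg2⟩ := List.mem_flatten.mp he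
      have hcols : (g2.headD dE).2.1 = ((c : Nat) : Int) := by
        rw [← hGcol g2 hg2 e heg2, hec]
      refine (PySem.List.le_foldl_max _ 0).2 _ ?_
      apply List.mem_map.mpr
      exact ⟨g2, hg2, by rw [hcols]⟩
    · have hzero : colSpec blocks ((c : Nat) : Int) = 0 := by
        apply colSpec_eq_zero
        intro bl hbl hcmem
        obtain ⟨p, hp, hpc⟩ := List.mem_map.mp hcmem
        obtain ⟨j, hj, hbleq⟩ := List.mem_iff_getElem.mp hbl
        apply hocc
        refine ⟨(p.1, p.2, ((1 + j : Nat) : Int)), ?_, by simpa using hpc⟩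
        apply (hmemL _).mpr
        apply (mem_locOfFrom blocks 1 _).mpr
        refine ⟨j, hj, ?_, rfl⟩
        rw [hbleq]
        simpa using hp
      rw [hzero]
      exact (PySem.List.le_foldl_max _ 0).1

-- ======== initial joint state ========
theorem init_SInv (land : List (List Int)) (N M : Nat) (n m : Int)
    (hn : n = (N : Int)) (hm : m = (M : Int)) (hNl : land.length = N) :
    SInv land N M
      ((PySem.List.pyRange 0 n 1).map (fun _ => PySem.List.pyRepeat [(0 : Int)] m), [], [], 1)
      (PySem.Set.empty, PySem.Dict.empty)
      [] := by
  have hrep : PySem.List.pyRepeat [(0 : Int)] m = List.replicate M 0 := by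
    rw [PySem.List.pyRepeat_singleton]
    congr 1
    omega
  refine ⟨⟨?_, ?_⟩, by norm_num, rfl, rfl, ?_, ?_, by simp, by simp, by simp, ?_, ?_, ?_⟩
  · simp only [List.length_map, PySem.List.length_pyRange_one]
    omega
  · intro row hrow
    obtain ⟨_, _, rfl⟩ := List.mem_map.mp hrow
    rw [hrep]
    simp
  · intro i j hij
    obtain ⟨h1, h2, h3, h4⟩ := hij
    rw [if_neg (by simp)]
    rw [gridGet_eq_getD h1 h3]
    have hilt : i.toNat < ((PySem.List.pyRange 0 n 1)).length := by
      rw [PySem.List.length_pyRange_one]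
      omega
    have hrow : ((PySem.List.pyRange 0 n 1).map
        (fun _ => PySem.List.pyRepeat [(0 : Int)] m)).getD i.toNat [] = List.replicate M 0 := by
      rw [List.getD_eq_getElem?_getD, List.getElem?_map, List.getElem?_eq_getElem hilt]
      simp [hrep]
    rw [hrow, List.getD_eq_getElem?_getD]
    by_cases hjM : j.toNat < M
    · rw [List.getElem?_eq_getElem (by simpa using hjM)]
      simp
    · rw [List.getElem?_eq_none (by simpa using hjM)]
      rfl
  · intro p
    simp [PySem.Set.empty]
  · simp [PySem.Dict.keys_empty]
  · intro c
    simp [PySem.Dict.keys_empty]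
  · intro c
    rw [PySem.Dict.getD_empty]
    simp [colSpec]

-- B's dict maximum equals the foldl-max of all column totals
theorem finalB (M : Nat) (blocks : List (List (Int × Int))) (D : PySem.Dict Int Int)
    (hknd : (PySem.Dict.keys D).Nodup)
    (hgetd : ∀ c : Int, PySem.Dict.getD D c 0 = colSpec blocks c)
    (hbound : ∀ c ∈ PySem.Dict.keys D, 0 ≤ c ∧ c < (M : Int))
    (hzero : ∀ c : Int, c ∉ PySem.Dict.keys D → colSpec blocks c = 0)
    (hne : PySem.Dict.keys D ≠ []) :
    PySem.List.maxD (PySem.Dict.values D) (fun v => v) 0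
      = ((List.range M).map (fun c : Nat => colSpec blocks ((c : Int)))).foldl max 0 := by
  rw [PySem.Dict.values_eq_map_keys D hknd 0]
  have hmape : (PySem.Dict.keys D).map (fun k => PySem.Dict.getD D k 0)
      = (PySem.Dict.keys D).map (fun c => colSpec blocks c) :=
    List.map_congr_left (fun c _ => hgetd c)
  rw [hmape]
  rw [maxD_id_eq_foldmax0 _ (by
      intro h
      exact hne (List.map_eq_nil_iff.mp h))
    (fun v hv => by
      obtain ⟨c, _, rfl⟩ := List.mem_map.mp hv
      exact colSpec_nonneg blocks c)]
  apply foldmax0_eq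
  · intro a ha
    obtain ⟨c, hck, rfl⟩ := List.mem_map.mp ha
    obtain ⟨h1, h2⟩ := hbound c hck
    refine (PySem.List.le_foldl_max _ 0).2 _ ?_
    refine List.mem_map.mpr ⟨c.toNat, List.mem_range.mpr (by omega), ?_⟩
    congr 1
    omega
  · intro v hv
    obtain ⟨c, _, rfl⟩ := List.mem_map.mp hv
    by_cases hck : ((c : Nat) : Int) ∈ PySem.Dict.keys D
    · exact (PySem.List.le_foldl_max _ 0).2 _ (List.mem_map.mpr ⟨_, hck, rfl⟩)
    · rw [hzero _ hck]
      exact (PySem.List.le_foldl_max _ 0).1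

-- ===== VERDICT (by name: the statement is the Claim_ definition above) =====
theorem solution_spec : Claim_equal_solution := by
  unfold Claim_equal_solution
  intro land _ hpre
  unfold Spec_solution
  obtain ⟨hnil, hm0, hrows, i0, hi0, j0, hj0, hnz⟩ := hpre
  have hn : PySem.List.len land = ((land.length : Nat) : Int) := PySem.List.len_eq land
  have hmm : PySem.List.len (PySem.List.pyGetD land 0 [])
      = (((PySem.List.pyGetD land 0 []).length : Nat) : Int) := PySem.List.len_eq _
  simp only [solution, solution_alt]
  rw [hn, hmm, foldl_nested_pairs, foldl_nested_pairs]
  have hPwin : ∀ p ∈ (PySem.List.pyRange 0 ((land.length : Nat) : Int) 1).flatMap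
      (fun i => (PySem.List.pyRange 0 (((PySem.List.pyGetD land 0 []).length : Nat) : Int) 1).map
        (fun j => (i, j))),
      inW land.length (PySem.List.pyGetD land 0 []).length p.1 p.2 := by
    intro p hp
    obtain ⟨i, hi, hj⟩ := List.mem_flatMap.mp hp
    obtain ⟨j, hjm, rfl⟩ := List.mem_map.mp hj
    rw [PySem.List.mem_pyRange_one] at hi hjm
    exact ⟨hi.1, hi.2, hjm.1, hjm.2⟩
  obtain ⟨blocks, hSf, ⟨pre1, hpre1⟩, hcover⟩ :=
    scan_fold (land := land) (N := land.length) (M := (PySem.List.pyGetD land 0 []).length)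
      rfl rfl (land.length * (PySem.List.pyGetD land 0 []).length + 1) _ _ _ []
      hPwin
      (init_SInv land land.length (PySem.List.pyGetD land 0 []).length _ _ rfl rfl rfl)
  obtain ⟨hsh, ht, hsz, hloc, hmk, hseen, hnd, hprops, hbne, hknd, hkeys, hgetd⟩ := hSf
  -- the nonzero witness cell is covered, so there is at least one component
  have hPmem : (((i0 : Nat) : Int), ((j0 : Nat) : Int)) ∈
      (PySem.List.pyRange 0 ((land.length : Nat) : Int) 1).flatMap
      (fun i => (PySem.List.pyRange 0 (((PySem.List.pyGetD land 0 []).length : Nat) : Int) 1).map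
        (fun j => (i, j))) := by
    apply List.mem_flatMap.mpr
    refine ⟨((i0 : Nat) : Int), ?_, ?_⟩
    · rw [PySem.List.mem_pyRange_one]
      exact ⟨Int.natCast_nonneg _, by exact_mod_cast hi0⟩
    · apply List.mem_map.mpr
      refine ⟨((j0 : Nat) : Int), ?_, rfl⟩
      rw [PySem.List.mem_pyRange_one]
      exact ⟨Int.natCast_nonneg _, by exact_mod_cast hj0⟩
  have hlnz : gridGet land ((i0 : Nat) : Int) ((j0 : Nat) : Int) ≠ 0 := by
    rw [gridGet_eq_getD (Int.natCast_nonneg _) (Int.natCast_nonneg _)]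
    simpa using hnz
  have htouch := hcover _ hPmem hlnz
  have hblocksne : blocks ≠ [] := by
    intro h
    rw [h] at htouch
    simp at htouch
  rw [hsz, hloc]
  -- the witness column is a key of B's dict, so its value list is nonempty
  obtain ⟨b0, hb0m, hj0b⟩ := List.mem_flatten.mp htouch
  have hkey0 := (hkeys ((j0 : Nat) : Int)).mpr
    ⟨b0, hb0m, List.mem_map.mpr ⟨(((i0 : Nat) : Int), ((j0 : Nat) : Int)), hj0b, rfl⟩⟩
  rw [finalB (PySem.List.pyGetD land 0 []).length blocks _ hknd hgetd
    (fun c hck => by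
      obtain ⟨bl, hbl, hcm⟩ := (hkeys c).mp hck
      obtain ⟨p, hp, hpc⟩ := List.mem_map.mp hcm
      have hpw := (hprops p (List.mem_flatten.mpr ⟨bl, hbl, hp⟩)).1
      obtain ⟨_, _, h3, h4⟩ := hpw
      exact hpc ▸ ⟨h3, h4⟩)
    (fun c hck => colSpec_eq_zero blocks c
      (fun bl hbl hcm => hck ((hkeys c).mpr ⟨bl, hbl, hcm⟩)))
    (List.ne_nil_of_mem hkey0)]
  exact tailA_eq land.length (PySem.List.pyGetD land 0 []).length blocks _ hsh hnd
    (fun p hp => (hprops p hp).1) hbne hblocksne _ rfl _ rfl _ rfl _ rfl
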